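-- pv_equiv track=rewrite | github.com/johnhuh619/Baekjoon | 프로그래머스/3/81303. 표 편집/표 편집.py | solution
-- ===== SOURCE A (Python) =====
-- def solution(n, k, cmd):
--     answer = ''
--     prev = [i-1 for i in range(n)]
--     next = [i+1 for i in range(n)]
--     next[-1] = -1
--     removed = []
--     alive = ["O"]*n
--     cur = k
--
--     for c in cmd:
--         parts = c.split()
--         cd = parts[0]
--
--         if cd == "U":
--             for _ in range(int(parts[1])):
--                 cur = prev[cur]
--         elif cd == "D":
--             for _ in range(int(parts[1])):
--                 cur = next[cur]
--         elif cd == "C":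
--             removed.append(cur)
--             alive[cur] = "X"
--             pn, nn = prev[cur], next[cur]
--             if pn != -1:
--                 next[pn] = nn
--             if nn != -1:
--                 prev[nn] = pn
--             cur = nn if nn != -1 else pn
--         elif cd == "Z":
--             # 삭제된 노드의 idx 를 활용
--             restore = removed.pop()
--             alive[restore] = "O"
--             pn, nn = prev[restore], next[restore]
--             if pn != -1:
--                 next[pn] = restore
--             if nn != -1:
--                 prev[nn] = restore
--
--     return ''.join(alive)
-- ===== SOURCE B (Python) =====
-- def solution(n, k, cmd):
--     # Different algorithm: the cursor is kept as a RANK in a sorted list of the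
--     # alive row indices (U/D are O(1) arithmetic; restore re-inserts by binary
--     # search), instead of walking prev/next pointer arrays one step at a time.
--     alive = list(range(n))
--     dead = []
--     pos = k
--     for c in cmd:
--         parts = c.split()
--         op = parts[0]
--         if op == "U":
--             pos -= int(parts[1])
--         elif op == "D":
--             pos += int(parts[1])
--         elif op == "C":
--             dead.append(alive.pop(pos))
--             if pos == len(alive):
--                 pos -= 1
--         elif op == "Z":
--             r = dead.pop()
--             lo, hi = 0, len(alive)
--             while lo < hi:
--                 mid = (lo + hi) // 2
--                 if alive[mid] < r:
--                     lo = mid + 1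
--                 else:
--                     hi = mid
--             alive.insert(lo, r)
--             if lo <= pos:
--                 pos += 1
--     res = ["X"] * n
--     for i in alive:
--         res[i] = "O"
--     return "".join(res)
-- ===== Notes on version B (the rewrite author's own statement) =====
-- stated objective: alternative
-- what changed: B replaces A's prev/next doubly-linked pointer arrays (U/D walk one node per step, delete/restore by pointer surgery) with a sorted list of alive row indices plus the cursor kept as a rank: U/D become O(1) arithmetic on the rank, delete is a pop at the rank, restore re-inserts the popped index by binary search.
-- outside the precondition, e.g. on solution(5, -2, ['C', 'C']): A returns 'OOOXX', B returns 'OOXXO'; on solution(5, 2, ['D -3', 'C']): A returns 'OOXOO', B returns 'OOOOX'; on solution(5, 3, ['U 9', 'C']): A returns 'OOOOX', B raises IndexError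
import Mathlib
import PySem

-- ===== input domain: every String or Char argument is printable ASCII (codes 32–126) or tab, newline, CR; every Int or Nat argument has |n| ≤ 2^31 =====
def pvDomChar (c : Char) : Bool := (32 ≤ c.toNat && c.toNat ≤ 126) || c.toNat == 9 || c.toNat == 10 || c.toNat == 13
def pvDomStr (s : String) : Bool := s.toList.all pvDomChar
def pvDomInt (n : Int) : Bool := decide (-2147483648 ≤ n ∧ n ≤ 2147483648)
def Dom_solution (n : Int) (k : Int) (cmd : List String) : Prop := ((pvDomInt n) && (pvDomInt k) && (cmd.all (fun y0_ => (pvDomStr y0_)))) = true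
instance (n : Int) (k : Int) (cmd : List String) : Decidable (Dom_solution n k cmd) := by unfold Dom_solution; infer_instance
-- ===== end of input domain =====

-- B re-implements the table editor with a sorted list of alive indices and the cursor as a rank
-- (U/D are O(1) rank arithmetic, restore re-inserts by binary search) instead of A's prev/next
-- pointer arrays walked one step at a time; equality of the returned string is proved on Pre_.

-- ===== PORT A =====
-- one command of A's loop; state (prev, next, removed, alive, cur); none = the Python raises
def stepA (st : List Int × List Int × List Int × List String × Int) (c : String) :
    Option (List Int × List Int × List Int × List String × Int) :=
  match st with
  | (prv, nxt, removed, alive, cur) =>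
    match PySem.List.pyGet? (PySem.Str.split₀ c) 0 with
    | none => none
    | some cd =>
      if cd = "U" then
        match PySem.List.pyGet? (PySem.Str.split₀ c) 1 with
        | none => none
        | some s =>
          match PySem.Int.ofStr? s with
          | none => none
          | some x =>
            match (PySem.List.pyRange 0 x 1).foldl
                (fun oc _ => oc.bind (fun cu => PySem.List.pyGet? prv cu)) (some cur) with
            | none => none
            | some cur' => some (prv, nxt, removed, alive, cur')
      else if cd = "D" then
        match PySem.List.pyGet? (PySem.Str.split₀ c) 1 with
        | none => none
        | some s =>
          match PySem.Int.ofStr? s with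
          | none => none
          | some x =>
            match (PySem.List.pyRange 0 x 1).foldl
                (fun oc _ => oc.bind (fun cu => PySem.List.pyGet? nxt cu)) (some cur) with
            | none => none
            | some cur' => some (prv, nxt, removed, alive, cur')
      else if cd = "C" then
        match PySem.List.pySet? alive cur "X" with
        | none => none
        | some alive' =>
          match PySem.List.pyGet? prv cur, PySem.List.pyGet? nxt cur with
          | some pn, some nn =>
            match (if pn ≠ -1 then PySem.List.pySet? nxt pn nn else some nxt) with
            | none => none
            | some nxt' =>
              match (if nn ≠ -1 then PySem.List.pySet? prv nn pn else some prv) with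
              | none => none
              | some prv' => some (prv', nxt', removed ++ [cur], alive', if nn ≠ -1 then nn else pn)
          | _, _ => none
      else if cd = "Z" then
        match PySem.List.pop? removed with
        | none => none
        | some (restore, removed') =>
          match PySem.List.pySet? alive restore "O" with
          | none => none
          | some alive' =>
            match PySem.List.pyGet? prv restore, PySem.List.pyGet? nxt restore with
            | some pn, some nn =>
              match (if pn ≠ -1 then PySem.List.pySet? nxt pn restore else some nxt) with
              | none => none
              | some nxt' =>
                match (if nn ≠ -1 then PySem.List.pySet? prv nn restore else some prv) with
                | none => none
                | some prv' => some (prv', nxt', removed', alive', cur)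
            | _, _ => none
      else some (prv, nxt, removed, alive, cur)

def runA (cs : List String) (o : Option (List Int × List Int × List Int × List String × Int)) :
    Option (List Int × List Int × List Int × List String × Int) :=
  cs.foldl (fun o c => o.bind (fun s => stepA s c)) o

def solution (n : Int) (k : Int) (cmd : List String) : String :=
  -- prev = [i-1 for i in range(n)], next = [i+1 for i in range(n)]; next[-1] = -1
  match PySem.List.pySet? ((PySem.List.pyRange 0 n 1).map (fun i => i + 1)) (-1) (-1) with
  | none => ""          -- n ≤ 0: Python's 'next[-1] = -1' raises IndexError
  | some nxt =>
    match runA cmd (some ((PySem.List.pyRange 0 n 1).map (fun i => i - 1), nxt, [],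
        PySem.List.pyRepeat ["O"] n, k)) with
    | none => ""
    | some st => PySem.Str.join "" st.2.2.2.1

-- ===== PORT B =====
-- the hand-written binary search of Source B ('while lo < hi: …'); lo, hi are nonnegative, so
-- Python's (lo+hi)//2 is exactly Nat division, and alive[mid] is always in range when called
-- with 0 ≤ lo ≤ hi ≤ len(alive), which is how Source B runs it
def bsLoop (alive : List Int) (r : Int) (lo hi : Nat) : Nat :=
  if _h : lo < hi then
    if PySem.List.pyGetD alive (((lo + hi) / 2 : Nat) : Int) 0 < r then
      bsLoop alive r ((lo + hi) / 2 + 1) hi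
    else bsLoop alive r lo ((lo + hi) / 2)
  else lo
termination_by hi - lo
decreasing_by all_goals omega

-- one command of Source B's loop; state (alive, dead, pos); none = the Python raises
def stepB (st : List Int × List Int × Int) (c : String) : Option (List Int × List Int × Int) :=
  match st with
  | (alive, dead, pos) =>
    match PySem.List.pyGet? (PySem.Str.split₀ c) 0 with
    | none => none
    | some op =>
      if op = "U" then
        match PySem.List.pyGet? (PySem.Str.split₀ c) 1 with
        | none => none
        | some s =>
          match PySem.Int.ofStr? s with
          | none => none
          | some x => some (alive, dead, pos - x)
      else if op = "D" then
        match PySem.List.pyGet? (PySem.Str.split₀ c) 1 with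
        | none => none
        | some s =>
          match PySem.Int.ofStr? s with
          | none => none
          | some x => some (alive, dead, pos + x)
      else if op = "C" then
        match PySem.List.pop? alive pos with
        | none => none
        | some (v, alive') =>
          some (alive', dead ++ [v], if pos = PySem.List.len alive' then pos - 1 else pos)
      else if op = "Z" then
        match PySem.List.pop? dead with
        | none => none
        | some (r, dead') =>
          let lo := bsLoop alive r 0 alive.length
          some (PySem.List.insert alive (lo : Int) r, dead',
                if (lo : Int) ≤ pos then pos + 1 else pos)
      else some (alive, dead, pos)

def runB (cs : List String) (o : Option (List Int × List Int × Int)) :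
    Option (List Int × List Int × Int) :=
  cs.foldl (fun o c => o.bind (fun s => stepB s c)) o

def solution_alt (n : Int) (k : Int) (cmd : List String) : String :=
  match runB cmd (some (PySem.List.pyRange 0 n 1, [], k)) with
  | none => ""
  | some st =>
    match st.1.foldl (fun o i => o.bind (fun r => PySem.List.pySet? r i "O"))
        (some (PySem.List.pyRepeat ["X"] n)) with
    | none => ""
    | some res => PySem.Str.join "" res

-- ===== PRECONDITION & SPEC =====
-- helpers Pre_ reads off a command string: parts[0] and int(parts[1])
def pHead (c : String) : Option String := PySem.List.pyGet? (PySem.Str.split₀ c) 0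
def pAmt (c : String) : Option Int :=
  match PySem.List.pyGet? (PySem.Str.split₀ c) 1 with
  | none => none
  | some s => PySem.Int.ofStr? s
-- a command A accepts without raising, with a nonnegative move amount after "U"/"D"
-- (a negative amount is excluded: A's 'for _ in range(x)' silently does nothing there)
def wf (c : String) : Bool :=
  match pHead c with
  | none => false
  | some h =>
    if h = "U" ∨ h = "D" then
      match pAmt c with
      | some x => decide (0 ≤ x)
      | none => false
    else true
-- the rows alive when the rows in stk are deleted, in increasing order
def aliveOf (n : Int) (stk : List Int) : List Int :=
  (PySem.List.pyRange 0 n 1).filter (fun i => !(stk.contains i))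
-- the cursor-validity automaton: tracks the cursor's rank and the stack of deleted rows and
-- checks that every cursor move and delete stays on the table and every Z has a row to restore
def okSteps (n : Int) : List String → Int → List Int → Bool
  | [], _, _ => true
  | c :: t, pos, stk =>
    if pHead c = some "U" then
      (if (pAmt c).getD 0 ≤ 0 then okSteps n t pos stk
       else decide (0 ≤ pos - (pAmt c).getD 0) && decide (pos < n - stk.length) &&
            okSteps n t (pos - (pAmt c).getD 0) stk)
    else if pHead c = some "D" then
      (if (pAmt c).getD 0 ≤ 0 then okSteps n t pos stk
       else decide (0 ≤ pos) && decide (pos + (pAmt c).getD 0 < n - stk.length) &&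
            okSteps n t (pos + (pAmt c).getD 0) stk)
    else if pHead c = some "C" then
      decide (0 ≤ pos) && decide (pos < n - stk.length) &&
        okSteps n t (if pos = n - stk.length - 1 then pos - 1 else pos)
          ((aliveOf n stk).getD pos.toNat 0 :: stk)
    else if pHead c = some "Z" then
      (match stk with
       | [] => false
       | r :: stk' =>
          okSteps n t
            (if (((aliveOf n stk).filter (fun i => decide (i < r))).length : Int) ≤ pos
             then pos + 1 else pos) stk')
    else okSteps n t pos stk

-- Pre_ is the task's own input guarantee: n ≥ 1 (A raises on n ≤ 0), commands well formed with
-- nonnegative move amounts, and the cursor stays on the table at every step with every "Z"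
-- matched by an earlier "C".  Outside it A raises, or (when the cursor leaves the table) A's
-- returned value comes from Python's negative-index wraparound on stale pointer arrays — an
-- accident of A's representation that B (whose cursor is a rank) does not reproduce.
def Pre_solution (n : Int) (k : Int) (cmd : List String) : Prop :=
  1 ≤ n ∧ (∀ c ∈ cmd, wf c = true) ∧ okSteps n cmd k [] = true
instance (n : Int) (k : Int) (cmd : List String) : Decidable (Pre_solution n k cmd) := by
  unfold Pre_solution; infer_instance

def pvWitness_solution : Int × Int × List String := (5, 2, ["U 1", "C", "D 1", "Z"])

def Spec_solution (n : Int) (k : Int) (cmd : List String) (out : String) : Prop := out = solution_alt n k cmd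
instance (n : Int) (k : Int) (cmd : List String) (out : String) : Decidable (Spec_solution n k cmd out) := by unfold Spec_solution; infer_instance

-- ===== CLAIM (what is proved, stated in full; the proofs are below) =====
def Claim_equal_solution : Prop := ∀ (n : Int) (k : Int) (cmd : List String), Dom_solution n k cmd → Pre_solution n k cmd → Spec_solution n k cmd (solution n k cmd)

-- ===== LEMMAS AND PROOFS =====

-- rank neighbours in the sorted alive list
def rkP (L : List Int) (j : Nat) : Int := if j = 0 then -1 else L.getD (j-1) (-1)
def rkN (L : List Int) (j : Nat) : Int := L.getD (j+1) (-1)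

-- the pointer arrays agree with the sorted alive list on every alive node
def LinksOK (prv nxt L : List Int) : Prop :=
  ∀ j, j < L.length →
    prv[(L.getD j (-1)).toNat]? = some (rkP L j) ∧ nxt[(L.getD j (-1)).toNat]? = some (rkN L j)

-- dancing-links invariant for the removed stack (listed top first): each removed node's stale
-- pointers name its neighbours in the alive set as it will be when that node is restored
def DeadInv (prv nxt : List Int) : List Int → List Int → Prop
  | [], _ => True
  | r :: rest, L => ∃ P S, L = P ++ S ∧ (∀ p ∈ P, p < r) ∧ (∀ s ∈ S, r < s) ∧
      prv[r.toNat]? = some (P.getLast?.getD (-1)) ∧ nxt[r.toNat]? = some (S.head?.getD (-1)) ∧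
      DeadInv prv nxt rest (P ++ r :: S)

structure SimInv (n : Int) (prv nxt removed : List Int) (alive : List String) (cur : Int)
    (L dead : List Int) (pos : Int) : Prop where
  hn : 1 ≤ n
  hplen : prv.length = n.toNat
  hnlen : nxt.length = n.toNat
  hrem : removed = dead
  hsort : L.Pairwise (· < ·)
  hLmem : ∀ i ∈ L, 0 ≤ i ∧ i < n
  hDmem : ∀ i ∈ dead, 0 ≤ i ∧ i < n
  hdisj : ∀ i ∈ dead, i ∉ L
  hDnd : dead.Nodup
  hlen : L.length + dead.length = n.toNat
  halive : alive = (List.range n.toNat).map (fun (j : Nat) => if (j : Int) ∈ L then "O" else "X")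
  -- the cursor: either a live rank, or parked off the table on both sides in the same way
  -- (cur = pos = -1 after the last row was deleted; cur = pos = k when k never was a row)
  hmode : (0 ≤ pos ∧ pos < (L.length : Int) ∧ cur = L.getD pos.toNat (-1)) ∨
          (cur = pos ∧ (pos ≤ -1 ∨ ((L.length : Int) ≤ pos ∧ dead = [])))
  hlinks : LinksOK prv nxt L
  hdead : DeadInv prv nxt dead.reverse L

-- ---------- small generic helpers ----------

theorem runA_cons (c : String) (cs : List String) (o) :
    runA (c :: cs) o = runA cs (o.bind (fun s => stepA s c)) := rfl

theorem runB_cons (c : String) (cs : List String) (o) :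
    runB (c :: cs) o = runB cs (o.bind (fun s => stepB s c)) := rfl

theorem foldl_const_iterate {α β : Type} (f : β → β) :
    ∀ (l : List α) (b : β), l.foldl (fun s _ => f s) b = f^[l.length] b := by
  intro l
  induction l with
  | nil => intro b; rfl
  | cons a t ih =>
    intro b
    simp only [List.foldl_cons, List.length_cons, Function.iterate_succ_apply]
    exact ih (f b)

theorem pySet?_nonneg' {α : Type} (xs : List α) (i : Int) (v : α)
    (h0 : 0 ≤ i) (hl : i.toNat < xs.length) :
    PySem.List.pySet? xs i v = some (xs.set i.toNat v) := by
  rw [← Int.toNat_of_nonneg h0]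
  exact PySem.List.pySet?_natCast xs i.toNat v hl

theorem pyGet?_nonneg' {α : Type} (xs : List α) (i : Int) (h0 : 0 ≤ i) :
    PySem.List.pyGet? xs i = xs[i.toNat]? := PySem.List.pyGet?_of_nonneg xs h0

theorem pySet?_neg_one {α : Type} (xs : List α) (v : α) (h : xs ≠ []) :
    PySem.List.pySet? xs (-1) v = some (xs.set (xs.length - 1) v) := by
  have hlen : 1 ≤ xs.length := List.length_pos_of_ne_nil h
  simp only [PySem.List.pySet?, PySem.List.pyIdx?]
  have h1 : ¬ (0 : Int) ≤ -1 := by omega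
  have h2 : -(xs.length : Int) ≤ -1 := by omega
  simp [h2]

-- ---------- chain lemmas for U / D walks ----------

theorem chainP (prv nxt L : List Int) (hlinks : LinksOK prv nxt L)
    (hnn : ∀ i ∈ L, 0 ≤ i) :
    ∀ (m j : Nat), m ≤ j → j < L.length →
      (fun oc => oc.bind (fun cu => PySem.List.pyGet? prv cu))^[m] (some (L.getD j (-1)))
        = some (L.getD (j - m) (-1)) := by
  intro m
  induction m with
  | zero => intro j _ _; simp
  | succ m ih =>
    intro j hmj hj
    rw [Function.iterate_succ_apply]
    have hstep : (some (L.getD j (-1))).bind (fun cu => PySem.List.pyGet? prv cu)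
        = some (L.getD (j - 1) (-1)) := by
      simp only [Option.bind_some]
      have hmem : L.getD j (-1) ∈ L := by
        rw [List.getD_eq_getElem L (-1) hj]; exact List.getElem_mem hj
      rw [pyGet?_nonneg' prv _ (hnn _ hmem)]
      have := (hlinks j hj).1
      rw [this]
      unfold rkP
      rw [if_neg (by omega)]
    rw [hstep]
    have heq : j - 1 - m = j - (m + 1) := by omega
    have := ih (j - 1) (by omega) (by omega)
    rw [this, heq]

theorem chainN (prv nxt L : List Int) (hlinks : LinksOK prv nxt L)
    (hnn : ∀ i ∈ L, 0 ≤ i) :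
    ∀ (m j : Nat), j + m < L.length →
      (fun oc => oc.bind (fun cu => PySem.List.pyGet? nxt cu))^[m] (some (L.getD j (-1)))
        = some (L.getD (j + m) (-1)) := by
  intro m
  induction m with
  | zero => intro j _; simp
  | succ m ih =>
    intro j hj
    rw [Function.iterate_succ_apply]
    have hstep : (some (L.getD j (-1))).bind (fun cu => PySem.List.pyGet? nxt cu)
        = some (L.getD (j + 1) (-1)) := by
      simp only [Option.bind_some]
      have hjl : j < L.length := by omega
      have hmem : L.getD j (-1) ∈ L := by
        rw [List.getD_eq_getElem L (-1) hjl]; exact List.getElem_mem hjl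
      rw [pyGet?_nonneg' nxt _ (hnn _ hmem)]
      have := (hlinks j hjl).2
      rw [this]
      rfl
    rw [hstep]
    have heq : j + 1 + m = j + (m + 1) := by omega
    have := ih (j + 1) (by omega)
    rw [this, heq]

-- ---------- alive string maintenance ----------

theorem set_map_range {α : Type} (m j : Nat) (v : α) (g : Nat → α) (hj : j < m) :
    ((List.range m).map g).set j v = (List.range m).map (fun x => if x = j then v else g x) := by
  apply List.ext_getElem
  · simp
  · intro i h1 h2
    simp only [List.getElem_set, List.getElem_map, List.getElem_range]
    by_cases hij : i = j
    · simp [hij]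
    · simp [hij, Ne.symm hij]

theorem setfold (m : Nat) : ∀ (L : List Int) (g : Nat → String),
    (∀ i ∈ L, 0 ≤ i ∧ i < (m : Int)) →
    L.foldl (fun o i => o.bind (fun r => PySem.List.pySet? r i "O"))
        (some ((List.range m).map g))
      = some ((List.range m).map (fun (j : Nat) => if (j : Int) ∈ L then "O" else g j)) := by
  intro L
  induction L with
  | nil => intro g _; simp
  | cons i t ih =>
    intro g hmem
    obtain ⟨h0i, him⟩ := hmem i (List.mem_cons_self ..)
    simp only [List.foldl_cons, Option.bind_some]
    have hset : PySem.List.pySet? ((List.range m).map g) i "O"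
        = some (((List.range m).map g).set i.toNat "O") := by
      apply pySet?_nonneg' _ _ _ h0i
      simp only [List.length_map, List.length_range]
      omega
    rw [hset, set_map_range m i.toNat "O" g (by omega)]
    rw [ih _ (fun x hx => hmem x (List.mem_cons_of_mem _ hx))]
    congr 1
    apply List.map_congr_left
    intro j hj
    rw [List.mem_range] at hj
    by_cases hjt : (j : Int) ∈ t
    · simp [hjt]
    · by_cases hji : j = i.toNat
      · have hji' : (j : Int) = i := by omega
        have hmemc : (j : Int) ∈ i :: t := by rw [hji']; exact List.mem_cons_self ..
        rw [if_neg hjt, if_pos hji, if_pos hmemc]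
      · have hji' : ¬ (j : Int) = i := by omega
        simp [hjt, hji, hji']

-- ---------- sorted decomposition facts ----------

theorem sorted_decomp (L : List Int) (p : Nat) (hp : p < L.length)
    (hsort : L.Pairwise (· < ·)) :
    L = L.take p ++ L[p] :: L.drop (p+1)
    ∧ (∀ y ∈ L.take p, y < L[p]) ∧ (∀ y ∈ L.drop (p+1), L[p] < y) := by
  refine ⟨?_, ?_, ?_⟩
  · conv_lhs => rw [← List.take_append_drop p L]
    rw [← List.getElem_cons_drop hp]
  · intro y hy
    rw [List.mem_iff_getElem] at hy
    obtain ⟨i, hi, rfl⟩ := hy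
    rw [List.length_take] at hi
    rw [List.getElem_take]
    exact List.pairwise_iff_getElem.1 hsort i p (by omega) hp (by omega)
  · intro y hy
    rw [List.mem_iff_getElem] at hy
    obtain ⟨i, hi, rfl⟩ := hy
    rw [List.length_drop] at hi
    rw [List.getElem_drop]
    exact List.pairwise_iff_getElem.1 hsort p (p+1+i) hp (by omega) (by omega)

-- getElem? of the two shapes of lists we juggle
theorem getElem?_mid (P S : List Int) (r : Int) (j : Nat) :
    (P ++ r :: S)[j]? = if j < P.length then P[j]? else if j = P.length then some r
      else S[j - P.length - 1]? := by
  by_cases h1 : j < P.length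
  · rw [List.getElem?_append_left h1, if_pos h1]
  · rw [List.getElem?_append_right (by omega)]
    by_cases h2 : j = P.length
    · simp [h2]
    · rw [if_neg h1, if_neg h2]
      obtain ⟨i, hi⟩ : ∃ i, j - P.length = i + 1 := ⟨j - P.length - 1, by omega⟩
      rw [hi, List.getElem?_cons_succ]
      simp

theorem getElem?_flat (P S : List Int) (j : Nat) :
    (P ++ S)[j]? = if j < P.length then P[j]? else S[j - P.length]? := by
  by_cases h1 : j < P.length
  · rw [List.getElem?_append_left h1, if_pos h1]
  · rw [List.getElem?_append_right (by omega), if_neg h1]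

-- ---------- links update lemmas ----------

-- value/index helper: getD of the two shapes
theorem getD_mid (P S : List Int) (r : Int) (j : Nat) :
    (P ++ r :: S).getD j (-1) = if j < P.length then P.getD j (-1) else if j = P.length then r
      else S.getD (j - P.length - 1) (-1) := by
  rw [List.getD_eq_getElem?_getD, getElem?_mid]
  split_ifs <;> simp [List.getD_eq_getElem?_getD]

theorem getD_flat (P S : List Int) (j : Nat) :
    (P ++ S).getD j (-1) = if j < P.length then P.getD j (-1) else S.getD (j - P.length) (-1) := by
  rw [List.getD_eq_getElem?_getD, getElem?_flat]
  split_ifs <;> simp [List.getD_eq_getElem?_getD]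

theorem getD_mem (l : List Int) (j : Nat) (d : Int) (h : j < l.length) : l.getD j d ∈ l := by
  rw [List.getD_eq_getElem l d h]; exact List.getElem_mem h

theorem getD_take' (l : List Int) (p j : Nat) (d : Int) (h : j < p) :
    (l.take p).getD j d = l.getD j d := by
  rw [List.getD_eq_getElem?_getD, List.getD_eq_getElem?_getD, List.getElem?_take, if_pos h]

theorem sorted_getD_lt (l : List Int) (d : Int) (hsort : l.Pairwise (· < ·)) (j1 j2 : Nat)
    (h1 : j1 < l.length) (h2 : j2 < l.length) (h : j1 < j2) :
    l.getD j1 d < l.getD j2 d := by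
  rw [List.getD_eq_getElem l d h1, List.getD_eq_getElem l d h2]
  exact List.pairwise_iff_getElem.1 hsort j1 j2 h1 h2 h

theorem read_after_set (l : List Int) (w v x : Int) (h0w : 0 ≤ w) (h0x : 0 ≤ x)
    (hwlt : w.toNat < l.length) :
    (l.set w.toNat v)[x.toNat]? = if x = w then some v else l[x.toNat]? := by
  by_cases hxw : x = w
  · subst hxw
    simp [hwlt]
  · rw [if_neg hxw]
    exact List.getElem?_set_ne (by omega)

theorem links_insert (prv nxt : List Int) (P S : List Int) (r : Int)
    (hnnP : ∀ p ∈ P, 0 ≤ p) (hnnS : ∀ s ∈ S, 0 ≤ s) (hr : 0 ≤ r)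
    (hPr : ∀ p ∈ P, p < r) (hrS : ∀ s ∈ S, r < s)
    (hsortP : P.Pairwise (· < ·)) (hsortS : S.Pairwise (· < ·))
    (hlinks : LinksOK prv nxt (P ++ S))
    (hp : prv[r.toNat]? = some (P.getLast?.getD (-1)))
    (hn : nxt[r.toNat]? = some (S.head?.getD (-1))) :
    LinksOK
      (if S.head?.getD (-1) ≠ -1 then prv.set (S.head?.getD (-1)).toNat r else prv)
      (if P.getLast?.getD (-1) ≠ -1 then nxt.set (P.getLast?.getD (-1)).toNat r else nxt)
      (P ++ r :: S) := by
  have hpnv : P.getLast?.getD (-1) = P.getD (P.length - 1) (-1) := by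
    rw [List.getLast?_eq_getElem?, List.getD_eq_getElem?_getD]
  have hnnv : S.head?.getD (-1) = S.getD 0 (-1) := by
    cases S <;> simp
  set m := P.length with hm
  set s := S.length with hs
  -- reads through the possibly-written arrays
  have hprv_read : ∀ x : Int, 0 ≤ x →
      (if S.head?.getD (-1) ≠ -1 then prv.set (S.head?.getD (-1)).toNat r else prv)[x.toNat]?
        = if x = S.head?.getD (-1) then some r else prv[x.toNat]? := by
    intro x h0x
    by_cases hS : S = []
    · subst hS
      simp only [List.head?_nil, Option.getD_none]
      rw [if_neg (by omega), if_neg (by omega)]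
    · have hs0 : 0 < s := List.length_pos_of_ne_nil hS
      have hmem : S.getD 0 (-1) ∈ S := getD_mem S 0 (-1) hs0
      have h0n : 0 ≤ S.getD 0 (-1) := hnnS _ hmem
      have hin : (S.getD 0 (-1)).toNat < prv.length := by
        have hcl := (hlinks m (by simp [hm]; omega)).1
        have hval : (P ++ S).getD m (-1) = S.getD 0 (-1) := by
          rw [getD_flat, if_neg (by omega)]
          have h00 : m - P.length = 0 := by omega
          rw [h00]
        rw [hval] at hcl
        have := List.getElem?_eq_some_iff.1 hcl
        exact this.1
      rw [if_pos (by rw [hnnv]; omega), hnnv]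
      exact read_after_set prv _ r x h0n h0x hin
  have hnxt_read : ∀ x : Int, 0 ≤ x →
      (if P.getLast?.getD (-1) ≠ -1 then nxt.set (P.getLast?.getD (-1)).toNat r else nxt)[x.toNat]?
        = if x = P.getLast?.getD (-1) then some r else nxt[x.toNat]? := by
    intro x h0x
    by_cases hP : P = []
    · subst hP
      simp only [List.getLast?_nil, Option.getD_none]
      rw [if_neg (by omega), if_neg (by omega)]
    · have hm0 : 0 < m := List.length_pos_of_ne_nil hP
      have hmem : P.getD (m-1) (-1) ∈ P := getD_mem P (m-1) (-1) (by omega)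
      have h0n : 0 ≤ P.getD (m-1) (-1) := hnnP _ hmem
      have hin : (P.getD (m-1) (-1)).toNat < nxt.length := by
        have hcl := (hlinks (m-1) (by simp [hm]; omega)).2
        have hval : (P ++ S).getD (m-1) (-1) = P.getD (m-1) (-1) := by
          rw [getD_flat]; rw [if_pos (by omega)]
        rw [hval] at hcl
        have := List.getElem?_eq_some_iff.1 hcl
        exact this.1
      rw [if_pos (by rw [hpnv]; omega), hpnv]
      exact read_after_set nxt _ r x h0n h0x hin
  intro j hj
  have hjlen : j < m + 1 + s := by
    simp only [List.length_append, List.length_cons] at hj; omega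
  have hTlen : (P ++ S).length = m + s := by simp [hm, hs]
  rcases Nat.lt_trichotomy j m with hjm | hjm | hjm
  · -- j < m : an element of P
    have hvj : (P ++ r :: S).getD j (-1) = P.getD j (-1) := by
      rw [getD_mid, if_pos hjm]
    have hmemv : P.getD j (-1) ∈ P := getD_mem P j (-1) hjm
    have h0v : 0 ≤ P.getD j (-1) := hnnP _ hmemv
    have hvr : P.getD j (-1) < r := hPr _ hmemv
    have hold := hlinks j (by omega)
    have holdv : (P ++ S).getD j (-1) = P.getD j (-1) := by
      rw [getD_flat, if_pos hjm]
    rw [holdv] at hold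
    constructor
    · rw [hvj, hprv_read _ h0v, if_neg ?hne]
      case hne =>
        by_cases hS : S = []
        · subst hS; simp only [List.head?_nil, Option.getD_none]; omega
        · have : r < S.getD 0 (-1) := hrS _ (getD_mem S 0 (-1) (List.length_pos_of_ne_nil hS))
          rw [hnnv]; omega
      rw [hold.1]
      congr 1
      unfold rkP
      by_cases hj0 : j = 0
      · simp [hj0]
      · rw [if_neg hj0, if_neg hj0, getD_mid, if_pos (by omega), getD_flat, if_pos (by omega)]
    · rw [hvj, hnxt_read _ h0v, hpnv]
      by_cases hjl : j = m - 1
      · rw [if_pos (by rw [hjl]), ]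
        congr 1
        unfold rkN
        rw [getD_mid]
        rw [if_neg (by omega), if_pos (by omega)]
      · rw [if_neg (sorted_getD_lt P (-1) hsortP _ _ hjm (by omega) (by omega)).ne]
        rw [hold.2]
        congr 1
        unfold rkN
        rw [getD_mid, if_pos (by omega), getD_flat, if_pos (by omega)]
  · -- j = m : the freshly inserted r
    have hvj : (P ++ r :: S).getD j (-1) = r := by
      rw [getD_mid, if_neg (by omega), if_pos (show j = P.length by omega)]
    constructor
    · rw [hvj, hprv_read _ hr, if_neg ?hner]
      case hner =>
        by_cases hS : S = []
        · subst hS; simp only [List.head?_nil, Option.getD_none]; omega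
        · have : r < S.getD 0 (-1) := hrS _ (getD_mem S 0 (-1) (List.length_pos_of_ne_nil hS))
          rw [hnnv]; omega
      rw [hp]
      congr 1
      unfold rkP
      rw [hpnv]
      by_cases hm0 : j = 0
      · have hPnil : P = [] := by
          apply List.eq_nil_of_length_eq_zero; omega
        rw [if_pos hm0, hPnil]
        simp
      · rw [if_neg hm0, getD_mid, if_pos (by omega)]
        congr 1
        omega
    · rw [hvj, hnxt_read _ hr, if_neg ?hnep]
      case hnep =>
        by_cases hP : P = []
        · subst hP; simp only [List.getLast?_nil, Option.getD_none]; omega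
        · have : P.getD (m-1) (-1) < r := hPr _ (getD_mem P (m-1) (-1) (by
            have := List.length_pos_of_ne_nil hP; omega))
          rw [hpnv]; omega
      rw [hn]
      congr 1
      unfold rkN
      rw [hnnv, getD_mid, if_neg (by omega), if_neg (by omega)]
      congr 1
      omega
  · -- j > m : an element of S
    have hi : j - m - 1 < s := by omega
    have hvj : (P ++ r :: S).getD j (-1) = S.getD (j - m - 1) (-1) := by
      rw [getD_mid, if_neg (by omega), if_neg (by omega)]
    have hmemv : S.getD (j-m-1) (-1) ∈ S := getD_mem S _ (-1) hi
    have h0v : 0 ≤ S.getD (j-m-1) (-1) := hnnS _ hmemv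
    have hrv : r < S.getD (j-m-1) (-1) := hrS _ hmemv
    have hold := hlinks (j-1) (by omega)
    have holdv : (P ++ S).getD (j-1) (-1) = S.getD (j-m-1) (-1) := by
      rw [getD_flat, if_neg (by omega)]
      congr 1
      omega
    rw [holdv] at hold
    constructor
    · rw [hvj, hprv_read _ h0v, hnnv]
      by_cases hi0 : j - m - 1 = 0
      · rw [if_pos (by rw [hi0])]
        congr 1
        unfold rkP
        rw [if_neg (by omega), getD_mid, if_neg (by omega), if_pos (by omega)]
      · rw [if_neg (sorted_getD_lt S (-1) hsortS 0 _ (by omega) hi (by omega)).ne']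
        rw [hold.1]
        congr 1
        unfold rkP
        rw [if_neg (by omega), if_neg (by omega), getD_mid, if_neg (by omega), if_neg (by omega),
          getD_flat, if_neg (by omega)]
        congr 1
        omega
    · rw [hvj, hnxt_read _ h0v, if_neg ?hnep2]
      case hnep2 =>
        by_cases hP : P = []
        · subst hP; simp only [List.getLast?_nil, Option.getD_none]; omega
        · have : P.getD (m-1) (-1) < r := hPr _ (getD_mem P (m-1) (-1) (by
            have := List.length_pos_of_ne_nil hP; omega))
          rw [hpnv]; omega
      rw [hold.2]
      congr 1
      unfold rkN
      rw [getD_mid, if_neg (by omega), if_neg (by omega), getD_flat]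
      by_cases hlast : j - m < s
      · rw [if_neg (by omega)]
        congr 1
        omega
      · -- j+1 past the end on both sides: both getD give the default
        rw [if_neg (by omega)]
        have e1 : S[j + 1 - m - 1]? = none := by
          rw [List.getElem?_eq_none_iff]; omega
        have e2 : S[j - 1 + 1 - m]? = none := by
          rw [List.getElem?_eq_none_iff]; omega
        rw [List.getD_eq_getElem?_getD, List.getD_eq_getElem?_getD, e1, e2]

theorem links_erase (prv nxt : List Int) (P S : List Int) (r : Int)
    (hnnP : ∀ p ∈ P, 0 ≤ p) (hnnS : ∀ s ∈ S, 0 ≤ s) (hr : 0 ≤ r)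
    (hPr : ∀ p ∈ P, p < r) (hrS : ∀ s ∈ S, r < s)
    (hsortP : P.Pairwise (· < ·)) (hsortS : S.Pairwise (· < ·))
    (hlinks : LinksOK prv nxt (P ++ r :: S)) :
    LinksOK
      (if S.head?.getD (-1) ≠ -1 then prv.set (S.head?.getD (-1)).toNat (P.getLast?.getD (-1)) else prv)
      (if P.getLast?.getD (-1) ≠ -1 then nxt.set (P.getLast?.getD (-1)).toNat (S.head?.getD (-1)) else nxt)
      (P ++ S) := by
  have hpnv : P.getLast?.getD (-1) = P.getD (P.length - 1) (-1) := by
    rw [List.getLast?_eq_getElem?, List.getD_eq_getElem?_getD]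
  have hnnv : S.head?.getD (-1) = S.getD 0 (-1) := by cases S <;> simp
  set m := P.length with hm
  set s := S.length with hs
  have hTlen : (P ++ r :: S).length = m + 1 + s := by
    simp only [List.length_append, List.length_cons]; omega
  have hprv_read : ∀ x : Int, 0 ≤ x →
      (if S.head?.getD (-1) ≠ -1 then prv.set (S.head?.getD (-1)).toNat (P.getLast?.getD (-1)) else prv)[x.toNat]?
        = if x = S.head?.getD (-1) then some (P.getLast?.getD (-1)) else prv[x.toNat]? := by
    intro x h0x
    by_cases hS : S = []
    · subst hS
      simp only [List.head?_nil, Option.getD_none]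
      rw [if_neg (by omega), if_neg (by omega)]
    · have hs0 : 0 < s := List.length_pos_of_ne_nil hS
      have hmem : S.getD 0 (-1) ∈ S := getD_mem S 0 (-1) hs0
      have h0n : 0 ≤ S.getD 0 (-1) := hnnS _ hmem
      have hin : (S.getD 0 (-1)).toNat < prv.length := by
        have hcl := (hlinks (m+1) (by omega)).1
        have hval : (P ++ r :: S).getD (m+1) (-1) = S.getD 0 (-1) := by
          rw [getD_mid, if_neg (by omega), if_neg (by omega)]
          have h00 : m + 1 - P.length - 1 = 0 := by omega
          rw [h00]
        rw [hval] at hcl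
        exact (List.getElem?_eq_some_iff.1 hcl).1
      rw [if_pos (by rw [hnnv]; omega), hnnv]
      exact read_after_set prv _ _ x h0n h0x hin
  have hnxt_read : ∀ x : Int, 0 ≤ x →
      (if P.getLast?.getD (-1) ≠ -1 then nxt.set (P.getLast?.getD (-1)).toNat (S.head?.getD (-1)) else nxt)[x.toNat]?
        = if x = P.getLast?.getD (-1) then some (S.head?.getD (-1)) else nxt[x.toNat]? := by
    intro x h0x
    by_cases hP : P = []
    · subst hP
      simp only [List.getLast?_nil, Option.getD_none]
      rw [if_neg (by omega), if_neg (by omega)]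
    · have hm0 : 0 < m := List.length_pos_of_ne_nil hP
      have hmem : P.getD (m-1) (-1) ∈ P := getD_mem P (m-1) (-1) (by omega)
      have h0n : 0 ≤ P.getD (m-1) (-1) := hnnP _ hmem
      have hin : (P.getD (m-1) (-1)).toNat < nxt.length := by
        have hcl := (hlinks (m-1) (by omega)).2
        have hval : (P ++ r :: S).getD (m-1) (-1) = P.getD (m-1) (-1) := by
          rw [getD_mid, if_pos (by omega)]
        rw [hval] at hcl
        exact (List.getElem?_eq_some_iff.1 hcl).1
      rw [if_pos (by rw [hpnv]; omega), hpnv]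
      exact read_after_set nxt _ _ x h0n h0x hin
  intro j hj
  have hjlen : j < m + s := by
    simp only [List.length_append] at hj; omega
  rcases Nat.lt_trichotomy j m with hjm | hjm | hjm
  · -- j < m : an element of P
    have hvj : (P ++ S).getD j (-1) = P.getD j (-1) := by
      rw [getD_flat, if_pos hjm]
    have hmemv : P.getD j (-1) ∈ P := getD_mem P j (-1) hjm
    have h0v : 0 ≤ P.getD j (-1) := hnnP _ hmemv
    have hold := hlinks j (by omega)
    have holdv : (P ++ r :: S).getD j (-1) = P.getD j (-1) := by
      rw [getD_mid, if_pos hjm]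
    rw [holdv] at hold
    constructor
    · rw [hvj, hprv_read _ h0v, if_neg ?hne]
      case hne =>
        by_cases hS : S = []
        · subst hS; simp only [List.head?_nil, Option.getD_none]; omega
        · have h1 : r < S.getD 0 (-1) := hrS _ (getD_mem S 0 (-1) (List.length_pos_of_ne_nil hS))
          have h2 : P.getD j (-1) < r := hPr _ hmemv
          rw [hnnv]; omega
      rw [hold.1]
      congr 1
      unfold rkP
      by_cases hj0 : j = 0
      · simp [hj0]
      · rw [if_neg hj0, if_neg hj0, getD_mid, if_pos (by omega), getD_flat, if_pos (by omega)]
    · rw [hvj, hnxt_read _ h0v, hpnv]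
      by_cases hjl : j = m - 1
      · rw [if_pos (by rw [hjl])]
        congr 1
        unfold rkN
        rw [hnnv, getD_flat, if_neg (by omega)]
        have h00 : j + 1 - P.length = 0 := by omega
        rw [h00]
      · rw [if_neg (sorted_getD_lt P (-1) hsortP _ _ hjm (by omega) (by omega)).ne]
        rw [hold.2]
        congr 1
        unfold rkN
        rw [getD_mid, if_pos (by omega), getD_flat, if_pos (by omega)]
  · -- j = m : the head of S (only exists when S ≠ [])
    have hs0 : 0 < s := by omega
    have hvj : (P ++ S).getD j (-1) = S.getD 0 (-1) := by
      rw [getD_flat, if_neg (by omega)]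
      have h00 : j - P.length = 0 := by omega
      rw [h00]
    have hmemv : S.getD 0 (-1) ∈ S := getD_mem S 0 (-1) hs0
    have h0v : 0 ≤ S.getD 0 (-1) := hnnS _ hmemv
    have hold := hlinks (j+1) (by omega)
    have holdv : (P ++ r :: S).getD (j+1) (-1) = S.getD 0 (-1) := by
      rw [getD_mid, if_neg (by omega), if_neg (by omega)]
      have h00 : j + 1 - P.length - 1 = 0 := by omega
      rw [h00]
    rw [holdv] at hold
    constructor
    · rw [hvj, hprv_read _ h0v, if_pos (by rw [hnnv])]
      congr 1
      unfold rkP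
      rw [hpnv]
      by_cases hm0 : j = 0
      · have hPnil : P = [] := by
          apply List.eq_nil_of_length_eq_zero; omega
        rw [if_pos hm0, hPnil]
        simp
      · rw [if_neg hm0, getD_flat, if_pos (by omega)]
        congr 1
        omega
    · rw [hvj, hnxt_read _ h0v, if_neg ?hnep]
      case hnep =>
        by_cases hP : P = []
        · subst hP; simp only [List.getLast?_nil, Option.getD_none]; omega
        · have h1 : P.getD (m-1) (-1) < r := hPr _ (getD_mem P (m-1) (-1) (by
            have := List.length_pos_of_ne_nil hP; omega))
          have h2 : r < S.getD 0 (-1) := hrS _ hmemv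
          rw [hpnv]; omega
      rw [hold.2]
      congr 1
      unfold rkN
      rw [getD_mid, if_neg (by omega), if_neg (by omega), getD_flat, if_neg (by omega)]
      congr 1
      omega
  · -- j > m : a later element of S
    have hi : j - m < s := by omega
    have hi1 : 1 ≤ j - m := by omega
    have hvj : (P ++ S).getD j (-1) = S.getD (j - m) (-1) := by
      rw [getD_flat, if_neg (by omega)]
    have hmemv : S.getD (j-m) (-1) ∈ S := getD_mem S _ (-1) hi
    have h0v : 0 ≤ S.getD (j-m) (-1) := hnnS _ hmemv
    have hold := hlinks (j+1) (by omega)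
    have holdv : (P ++ r :: S).getD (j+1) (-1) = S.getD (j-m) (-1) := by
      rw [getD_mid, if_neg (by omega), if_neg (by omega)]
      congr 1
      omega
    rw [holdv] at hold
    constructor
    · rw [hvj, hprv_read _ h0v, hnnv]
      rw [if_neg (sorted_getD_lt S (-1) hsortS 0 _ (by omega) hi (by omega)).ne']
      rw [hold.1]
      congr 1
      unfold rkP
      rw [if_neg (by omega), if_neg (by omega), getD_mid, if_neg (by omega), if_neg (by omega),
        getD_flat, if_neg (by omega)]
      congr 1
      omega
    · rw [hvj, hnxt_read _ h0v, if_neg ?hnep2]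
      case hnep2 =>
        by_cases hP : P = []
        · subst hP; simp only [List.getLast?_nil, Option.getD_none]; omega
        · have h1 : P.getD (m-1) (-1) < r := hPr _ (getD_mem P (m-1) (-1) (by
            have := List.length_pos_of_ne_nil hP; omega))
          have h2 : r < S.getD (j-m) (-1) := hrS _ hmemv
          rw [hpnv]; omega
      rw [hold.2]
      congr 1
      unfold rkN
      rw [getD_mid, if_neg (by omega), if_neg (by omega), getD_flat, if_neg (by omega)]
      congr 1
      omega

theorem deadinv_stable (prv nxt prv' nxt' : List Int) :
    ∀ (ds : List Int) (X : List Int),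
    (∀ r ∈ ds, prv'[r.toNat]? = prv[r.toNat]? ∧ nxt'[r.toNat]? = nxt[r.toNat]?) →
    DeadInv prv nxt ds X → DeadInv prv' nxt' ds X := by
  intro ds
  induction ds with
  | nil => intro X _ _; trivial
  | cons r rest ih =>
    intro X hagree hd
    obtain ⟨P, S, hX, hP, hS, hpr, hnr, hrest⟩ := hd
    refine ⟨P, S, hX, hP, hS, ?_, ?_, ?_⟩
    · rw [(hagree r (List.mem_cons_self ..)).1]; exact hpr
    · rw [(hagree r (List.mem_cons_self ..)).2]; exact hnr
    · exact ih _ (fun x hx => hagree x (List.mem_cons_of_mem _ hx)) hrest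

-- ---------- binary search ----------

theorem bsLoop_spec (L : List Int) (r : Int) (t : Nat)
    (hchar : ∀ j, (hj : j < L.length) → (j < t ↔ L[j] < r)) (ht : t ≤ L.length) :
    ∀ (d lo hi : Nat), hi - lo ≤ d → hi ≤ L.length → lo ≤ t → t ≤ hi →
      bsLoop L r lo hi = t := by
  intro d
  induction d with
  | zero =>
    intro lo hi h1 _ h3 h4
    rw [bsLoop]
    rw [dif_neg (by omega)]
    omega
  | succ d ih =>
    intro lo hi h1 h2 h3 h4
    rw [bsLoop]
    by_cases hlh : lo < hi
    · rw [dif_pos hlh]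
      have hmid : (lo + hi) / 2 < L.length := by omega
      have hget : PySem.List.pyGetD L (((lo + hi) / 2 : Nat) : Int) 0 = L[(lo + hi) / 2] := by
        rw [PySem.List.pyGetD_natCast]
        exact List.getD_eq_getElem L 0 hmid
      rw [hget]
      by_cases hlt : L[(lo + hi) / 2] < r
      · rw [if_pos hlt]
        have : (lo + hi) / 2 < t := (hchar _ hmid).2 hlt
        exact ih ((lo+hi)/2 + 1) hi (by omega) h2 (by omega) h4
      · rw [if_neg hlt]
        have : ¬ ((lo + hi) / 2 < t) := fun hc => hlt ((hchar _ hmid).1 hc)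
        exact ih lo ((lo+hi)/2) (by omega) (by omega) h3 (by omega)
    · rw [dif_neg hlh]
      omega

theorem bsLoop_decomp (P S : List Int) (r : Int)
    (hPr : ∀ p ∈ P, p < r) (hrS : ∀ s ∈ S, r < s) :
    bsLoop (P ++ S) r 0 (P ++ S).length = P.length := by
  have hchar : ∀ j, (hj : j < (P ++ S).length) → (j < P.length ↔ (P ++ S)[j] < r) := by
    intro j hj
    rcases Nat.lt_or_ge j P.length with hjP | hjP
    · rw [List.getElem_append_left hjP]
      exact ⟨fun _ => hPr _ (List.getElem_mem _), fun _ => hjP⟩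
    · rw [List.getElem_append_right hjP]
      have hjS : j - P.length < S.length := by
        rw [List.length_append] at hj; omega
      constructor
      · intro h; omega
      · intro h
        have := hrS _ (List.getElem_mem hjS)
        omega
  exact bsLoop_spec (P ++ S) r P.length hchar (by simp) ((P++S).length) 0 ((P++S).length)
    (by omega) le_rfl (Nat.zero_le _) (by simp)

-- ---------- the alive list is determined by the deleted stack ----------

theorem filter_true_of_all {l : List Int} {p : Int → Bool} (h : ∀ a ∈ l, p a = true) :
    l.filter p = l := List.filter_eq_self.2 h

theorem alive_char (n : Int) (prv nxt removed : List Int) (alive : List String) (cur : Int)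
    (L dead : List Int) (pos : Int)
    (hInv : SimInv n prv nxt removed alive cur L dead pos) :
    aliveOf n dead.reverse = L := by
  obtain ⟨hn, _, _, _, hsort, hLmem, hDmem, hdisj, hDnd, hlen, _, _, _, _⟩ := hInv
  have hmemF : ∀ i : Int, i ∈ aliveOf n dead.reverse ↔ (0 ≤ i ∧ i < n) ∧ i ∉ dead := by
    intro i
    simp [aliveOf, List.mem_filter, PySem.List.mem_pyRange_one, List.contains_iff_mem]
  have hFnd : (aliveOf n dead.reverse).Nodup := (PySem.List.nodup_pyRange_one 0 n).filter _
  have hFsort : (aliveOf n dead.reverse).Pairwise (· < ·) :=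
    (PySem.List.pairwise_lt_pyRange_one 0 n).filter _
  have hLnd : L.Nodup := hsort.imp (fun h => ne_of_lt h)
  have hLsub : L ⊆ aliveOf n dead.reverse := by
    intro i hi
    exact (hmemF i).2 ⟨hLmem i hi, fun hd => hdisj i hd hi⟩
  -- the filtered-out part is a permutation of dead
  have hDlen : ((PySem.List.pyRange 0 n 1).filter
      (fun i => (dead.reverse).contains i)).length = dead.length := by
    have hperm : ((PySem.List.pyRange 0 n 1).filter
        (fun i => (dead.reverse).contains i)).Perm dead := by
      rw [List.perm_ext_iff_of_nodup ((PySem.List.nodup_pyRange_one 0 n).filter _) hDnd]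
      intro a
      simp only [List.mem_filter, PySem.List.mem_pyRange_one, List.contains_iff_mem,
        List.mem_reverse]
      exact ⟨fun h => h.2, fun h => ⟨⟨(hDmem a h).1, (hDmem a h).2⟩, h⟩⟩
    exact hperm.length_eq
  have hsplit := List.length_eq_length_filter_add
    (l := PySem.List.pyRange 0 n 1) (fun i => (dead.reverse).contains i)
  have hRlen : (PySem.List.pyRange 0 n 1).length = n.toNat := by
    rw [PySem.List.length_pyRange_one]; omega
  have hFlen : (aliveOf n dead.reverse).length = L.length := by
    unfold aliveOf
    omega
  have hperm : L.Perm (aliveOf n dead.reverse) :=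
    (List.subperm_of_subset hLnd hLsub).perm_of_length_le (by omega)
  have e1 := PySem.List.sorted_eq_of_perm_of_pairwise_lt
    (aliveOf n dead.reverse) L (fun x => x) hperm hsort
  have e2 := PySem.List.sorted_eq_of_perm_of_pairwise_lt
    (aliveOf n dead.reverse) (aliveOf n dead.reverse) (fun x => x) (List.Perm.refl _) hFsort
  rw [e2] at e1
  exact e1

-- ---------- unfolding the validity automaton one command at a time ----------

theorem okSteps_U (n : Int) (c : String) (t : List String) (pos : Int) (stk : List Int)
    (hh : pHead c = some "U") :
    okSteps n (c :: t) pos stk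
      = (if (pAmt c).getD 0 ≤ 0 then okSteps n t pos stk
         else decide (0 ≤ pos - (pAmt c).getD 0) && decide (pos < n - stk.length) &&
              okSteps n t (pos - (pAmt c).getD 0) stk) := by
  simp [okSteps, hh]

theorem okSteps_D (n : Int) (c : String) (t : List String) (pos : Int) (stk : List Int)
    (hh : pHead c = some "D") :
    okSteps n (c :: t) pos stk
      = (if (pAmt c).getD 0 ≤ 0 then okSteps n t pos stk
         else decide (0 ≤ pos) && decide (pos + (pAmt c).getD 0 < n - stk.length) &&
              okSteps n t (pos + (pAmt c).getD 0) stk) := by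
  simp [okSteps, hh]

theorem okSteps_C (n : Int) (c : String) (t : List String) (pos : Int) (stk : List Int)
    (hh : pHead c = some "C") :
    okSteps n (c :: t) pos stk
      = (decide (0 ≤ pos) && decide (pos < n - stk.length) &&
         okSteps n t (if pos = n - stk.length - 1 then pos - 1 else pos)
           ((aliveOf n stk).getD pos.toNat 0 :: stk)) := by
  simp [okSteps, hh]

theorem okSteps_Z_nil (n : Int) (c : String) (t : List String) (pos : Int)
    (hh : pHead c = some "Z") :
    okSteps n (c :: t) pos [] = false := by
  simp [okSteps, hh]

theorem okSteps_Z_cons (n : Int) (c : String) (t : List String) (pos : Int)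
    (r : Int) (stk' : List Int) (hh : pHead c = some "Z") :
    okSteps n (c :: t) pos (r :: stk')
      = okSteps n t
          (if (((aliveOf n (r :: stk')).filter (fun i => decide (i < r))).length : Int) ≤ pos
           then pos + 1 else pos) stk' := by
  simp [okSteps, hh]

theorem okSteps_other (n : Int) (c : String) (t : List String) (pos : Int) (stk : List Int)
    (h : String) (hh : pHead c = some h)
    (hU : ¬ h = "U") (hD : ¬ h = "D") (hC : ¬ h = "C") (hZ : ¬ h = "Z") :
    okSteps n (c :: t) pos stk = okSteps n t pos stk := by
  simp [okSteps, hh, hU, hD, hC, hZ]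

-- ---------- the step cases ----------

theorem case_skip (c : String) (h : String)
    (prv nxt removed : List Int) (alive : List String) (cur : Int)
    (L dead : List Int) (pos : Int)
    (hh : pHead c = some h)
    (hU : ¬ h = "U") (hD : ¬ h = "D") (hC : ¬ h = "C") (hZ : ¬ h = "Z") :
    stepA (prv, nxt, removed, alive, cur) c = some (prv, nxt, removed, alive, cur) ∧
    stepB (L, dead, pos) c = some (L, dead, pos) := by
  have hh' : PySem.List.pyGet? (PySem.Str.split₀ c) 0 = some h := hh
  constructor
  · simp [stepA, hh', hU, hD, hC, hZ]
  · simp [stepB, hh', hU, hD, hC, hZ]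

-- a "U 0" / "D 0" command: A's for-loop runs zero times, B adds zero; both are no-ops
theorem case_UD0 (c : String) (s : String) (h : String)
    (prv nxt removed : List Int) (alive : List String) (cur : Int)
    (L dead : List Int) (pos : Int)
    (hh : pHead c = some h) (hUD : h = "U" ∨ h = "D")
    (hs1 : PySem.List.pyGet? (PySem.Str.split₀ c) 1 = some s)
    (hofs : PySem.Int.ofStr? s = some 0) :
    stepA (prv, nxt, removed, alive, cur) c = some (prv, nxt, removed, alive, cur) ∧
    stepB (L, dead, pos) c = some (L, dead, pos) := by
  have hrange : PySem.List.pyRange 0 0 1 = [] := by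
    have := PySem.List.length_pyRange_one 0 0
    exact List.eq_nil_of_length_eq_zero (by omega)
  rcases hUD with rfl | rfl
  · have hh' : PySem.List.pyGet? (PySem.Str.split₀ c) 0 = some "U" := hh
    constructor
    · simp [stepA, hh', hs1, hofs, hrange]
    · simp [stepB, hh', hs1, hofs]
  · have hh' : PySem.List.pyGet? (PySem.Str.split₀ c) 0 = some "D" := hh
    constructor
    · simp [stepA, hh', hs1, hofs, hrange]
    · simp [stepB, hh', hs1, hofs]

theorem live_of_mode (L dead : List Int) (cur pos : Int)
    (hmode : (0 ≤ pos ∧ pos < (L.length : Int) ∧ cur = L.getD pos.toNat (-1)) ∨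
             (cur = pos ∧ (pos ≤ -1 ∨ ((L.length : Int) ≤ pos ∧ dead = []))))
    (h0 : 0 ≤ pos) (hlt : pos < (L.length : Int)) : cur = L.getD pos.toNat (-1) := by
  rcases hmode with ⟨_, _, h⟩ | ⟨_, h2 | ⟨h3, _⟩⟩
  · exact h
  · exact absurd h2 (by omega)
  · exact absurd h3 (by omega)

theorem case_U (n : Int) (c : String) (s : String) (x : Int)
    (prv nxt removed : List Int) (alive : List String) (cur : Int)
    (L dead : List Int) (pos : Int)
    (hh : pHead c = some "U")
    (hs1 : PySem.List.pyGet? (PySem.Str.split₀ c) 1 = some s)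
    (hofs : PySem.Int.ofStr? s = some x)
    (hx1 : 1 ≤ x) (hv0 : 0 ≤ pos - x) (hvs : pos < (L.length : Int))
    (hInv : SimInv n prv nxt removed alive cur L dead pos) :
    stepA (prv, nxt, removed, alive, cur) c
        = some (prv, nxt, removed, alive, L.getD (pos - x).toNat (-1)) ∧
    stepB (L, dead, pos) c = some (L, dead, pos - x) ∧
    SimInv n prv nxt removed alive (L.getD (pos - x).toNat (-1)) L dead (pos - x) := by
  have hh' : PySem.List.pyGet? (PySem.Str.split₀ c) 0 = some "U" := hh
  have hpos0 : 0 ≤ pos := by omega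
  have hcur : cur = L.getD pos.toNat (-1) := live_of_mode L dead cur pos hInv.hmode hpos0 hvs
  have hfold : (PySem.List.pyRange 0 x 1).foldl
      (fun oc _ => oc.bind (fun cu => PySem.List.pyGet? prv cu)) (some cur)
      = some (L.getD (pos - x).toNat (-1)) := by
    rw [foldl_const_iterate]
    rw [PySem.List.length_pyRange_one]
    rw [hcur]
    have hch := chainP prv nxt L hInv.hlinks (fun i hi => (hInv.hLmem i hi).1)
      (x - 0).toNat pos.toNat (by omega) (by omega)
    rw [hch]
    have heq : pos.toNat - (x - 0).toNat = (pos - x).toNat := by omega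
    rw [heq]
  refine ⟨?_, ?_, ?_⟩
  · simp [stepA, hh', hs1, hofs, hfold]
  · simp [stepB, hh', hs1, hofs]
  · exact { hInv with hmode := Or.inl ⟨by omega, by omega, rfl⟩ }

theorem case_D (n : Int) (c : String) (s : String) (x : Int)
    (prv nxt removed : List Int) (alive : List String) (cur : Int)
    (L dead : List Int) (pos : Int)
    (hh : pHead c = some "D")
    (hs1 : PySem.List.pyGet? (PySem.Str.split₀ c) 1 = some s)
    (hofs : PySem.Int.ofStr? s = some x)
    (hx1 : 1 ≤ x) (hv0 : 0 ≤ pos) (hvs : pos + x < (L.length : Int))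
    (hInv : SimInv n prv nxt removed alive cur L dead pos) :
    stepA (prv, nxt, removed, alive, cur) c
        = some (prv, nxt, removed, alive, L.getD (pos + x).toNat (-1)) ∧
    stepB (L, dead, pos) c = some (L, dead, pos + x) ∧
    SimInv n prv nxt removed alive (L.getD (pos + x).toNat (-1)) L dead (pos + x) := by
  have hh' : PySem.List.pyGet? (PySem.Str.split₀ c) 0 = some "D" := hh
  have hcur : cur = L.getD pos.toNat (-1) :=
    live_of_mode L dead cur pos hInv.hmode hv0 (by omega)
  have hfold : (PySem.List.pyRange 0 x 1).foldl
      (fun oc _ => oc.bind (fun cu => PySem.List.pyGet? nxt cu)) (some cur)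
      = some (L.getD (pos + x).toNat (-1)) := by
    rw [foldl_const_iterate]
    rw [PySem.List.length_pyRange_one]
    rw [hcur]
    have hch := chainN prv nxt L hInv.hlinks (fun i hi => (hInv.hLmem i hi).1)
      (x - 0).toNat pos.toNat (by omega)
    rw [hch]
    have heq : pos.toNat + (x - 0).toNat = (pos + x).toNat := by omega
    rw [heq]
  refine ⟨?_, ?_, ?_⟩
  · simp [stepA, hh', hs1, hofs, hfold]
  · simp [stepB, hh', hs1, hofs]
  · exact { hInv with hmode := Or.inl ⟨by omega, by omega, rfl⟩ }

theorem case_C (n : Int) (c : String)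
    (prv nxt removed : List Int) (alive : List String) (cur : Int)
    (L dead : List Int) (pos : Int)
    (hh : pHead c = some "C") (hv0 : 0 ≤ pos) (hvs : pos < (L.length : Int))
    (hInv : SimInv n prv nxt removed alive cur L dead pos) :
    stepA (prv, nxt, removed, alive, cur) c = some
      ((if rkN L pos.toNat ≠ -1 then prv.set (rkN L pos.toNat).toNat (rkP L pos.toNat) else prv),
       (if rkP L pos.toNat ≠ -1 then nxt.set (rkP L pos.toNat).toNat (rkN L pos.toNat) else nxt),
       removed ++ [cur],
       ((List.range n.toNat).map (fun (j : Nat) => if (j : Int) ∈ L.eraseIdx pos.toNat then "O" else "X")),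
       (if rkN L pos.toNat ≠ -1 then rkN L pos.toNat else rkP L pos.toNat)) ∧
    stepB (L, dead, pos) c = some (L.eraseIdx pos.toNat, dead ++ [cur],
       (if pos = PySem.List.len (L.eraseIdx pos.toNat) then pos - 1 else pos)) ∧
    SimInv n
      (if rkN L pos.toNat ≠ -1 then prv.set (rkN L pos.toNat).toNat (rkP L pos.toNat) else prv)
      (if rkP L pos.toNat ≠ -1 then nxt.set (rkP L pos.toNat).toNat (rkN L pos.toNat) else nxt)
      (removed ++ [cur])
      ((List.range n.toNat).map (fun (j : Nat) => if (j : Int) ∈ L.eraseIdx pos.toNat then "O" else "X"))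
      (if rkN L pos.toNat ≠ -1 then rkN L pos.toNat else rkP L pos.toNat)
      (L.eraseIdx pos.toNat) (dead ++ [cur])
      (if pos = PySem.List.len (L.eraseIdx pos.toNat) then pos - 1 else pos) ∧
    (if pos = PySem.List.len (L.eraseIdx pos.toNat) then pos - 1 else pos)
      = (if pos = (L.length : Int) - 1 then pos - 1 else pos) := by
  have hh' : PySem.List.pyGet? (PySem.Str.split₀ c) 0 = some "C" := hh
  obtain ⟨hn, hplen, hnlen, hrem, hsort, hLmem, hDmem, hdisj, hDnd, hlen, halive,
    hmode, hlinks, hdead⟩ := hInv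
  have hpos0 : 0 ≤ pos := hv0
  have hposlt : pos < (L.length : Int) := hvs
  have hcur : cur = L.getD pos.toNat (-1) :=
    live_of_mode L dead cur pos hmode hpos0 hposlt
  set p := pos.toNat with hpdef
  have hp : p < L.length := by omega
  obtain ⟨hdecomp, hPlt, hSgt⟩ := sorted_decomp L p hp hsort
  set P := L.take p with hPdef
  set S := L.drop (p+1) with hSdef
  have hPlen : P.length = p := by rw [hPdef, List.length_take]; omega
  have hSlen : S.length = L.length - p - 1 := by rw [hSdef, List.length_drop]; omega
  have hcurval : cur = L[p] := by rw [hcur, List.getD_eq_getElem _ _ hp]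
  have hcmem : cur ∈ L := by rw [hcurval]; exact List.getElem_mem hp
  have h0cur : 0 ≤ cur := (hLmem _ hcmem).1
  have hcurn : cur < n := (hLmem _ hcmem).2
  have hPsub : ∀ y ∈ P, y ∈ L := fun y hy => List.take_subset _ _ hy
  have hSsub : ∀ y ∈ S, y ∈ L := fun y hy => List.drop_subset _ _ hy
  have hsortP : P.Pairwise (· < ·) := hsort.sublist (List.take_sublist _ _)
  have hsortS : S.Pairwise (· < ·) := hsort.sublist (List.drop_sublist _ _)
  have herase : L.eraseIdx p = P ++ S := List.eraseIdx_eq_take_drop_succ L p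
  have herlen : (L.eraseIdx p).length + 1 = L.length := by
    rw [herase, List.length_append]; omega
  -- neighbour values
  have hlk := hlinks p hp
  rw [← hcur] at hlk
  have hpn_eq : rkP L p = P.getLast?.getD (-1) := by
    have h1 : P.getLast?.getD (-1) = P.getD (P.length - 1) (-1) := by
      rw [List.getLast?_eq_getElem?, List.getD_eq_getElem?_getD]
    rw [h1, hPlen]
    unfold rkP
    by_cases hp0 : p = 0
    · have : P = [] := by
        apply List.eq_nil_of_length_eq_zero; omega
      rw [if_pos hp0, this]
      simp
    · rw [if_neg hp0, hPdef]
      exact (getD_take' L p (p-1) (-1) (by omega)).symm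
  have hnn_eq : rkN L p = S.head?.getD (-1) := by
    unfold rkN
    rw [hSdef, List.head?_drop, List.getD_eq_getElem?_getD]
  have hpn_cases : (1 ≤ p ∧ rkP L p = L.getD (p-1) (-1) ∧ 0 ≤ rkP L p ∧ rkP L p ∈ L)
      ∨ (p = 0 ∧ rkP L p = -1) := by
    by_cases hp0 : p = 0
    · right
      refine ⟨hp0, ?_⟩
      unfold rkP; rw [if_pos hp0]
    · left
      have hv : rkP L p = L.getD (p-1) (-1) := by unfold rkP; rw [if_neg hp0]
      have hmem : L.getD (p-1) (-1) ∈ L := getD_mem L (p-1) (-1) (by omega)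
      exact ⟨by omega, hv, hv ▸ (hLmem _ hmem).1, hv ▸ hmem⟩
  have hnn_cases : (p + 1 < L.length ∧ rkN L p = L.getD (p+1) (-1) ∧ 0 ≤ rkN L p ∧ rkN L p ∈ L)
      ∨ (p + 1 = L.length ∧ rkN L p = -1) := by
    by_cases hp1 : p + 1 < L.length
    · left
      have hmem : L.getD (p+1) (-1) ∈ L := getD_mem L (p+1) (-1) hp1
      exact ⟨hp1, rfl, (hLmem _ hmem).1, hmem⟩
    · right
      refine ⟨by omega, ?_⟩
      unfold rkN
      rw [List.getD_eq_getElem?_getD, List.getElem?_eq_none_iff.2 (by omega)]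
      rfl
  -- the A-side primitive evaluations
  have h1 : PySem.List.pySet? alive cur "X"
      = some (alive.set cur.toNat "X") := by
    apply pySet?_nonneg' _ _ _ h0cur
    rw [halive]
    simp only [List.length_map, List.length_range]
    omega
  have halive2 : alive.set cur.toNat "X"
      = (List.range n.toNat).map (fun (j : Nat) => if (j : Int) ∈ L.eraseIdx p then "O" else "X") := by
    rw [halive, set_map_range n.toNat cur.toNat "X" _ (by omega)]
    apply List.map_congr_left
    intro j hj
    rw [List.mem_range] at hj
    by_cases hji : j = cur.toNat
    · have hjc : (j : Int) = cur := by omega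
      have hnm : (j : Int) ∉ L.eraseIdx p := by
        rw [herase, hjc]
        intro hmem
        rcases List.mem_append.1 hmem with hx | hx
        · exact absurd (hPlt _ hx) (by rw [hcurval]; omega)
        · exact absurd (hSgt _ hx) (by rw [hcurval]; omega)
      rw [if_pos hji, if_neg hnm]
    · have hjc : (j : Int) ≠ cur := by omega
      have hiff : (j : Int) ∈ L.eraseIdx p ↔ (j : Int) ∈ L := by
        rw [herase]
        conv_rhs => rw [hdecomp]
        simp only [List.mem_append, List.mem_cons]
        constructor
        · rintro (hx | hx)
          · exact Or.inl hx
          · exact Or.inr (Or.inr hx)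
        · rintro (hx | hx | hx)
          · exact Or.inl hx
          · exact absurd (hx.trans hcurval.symm) hjc
          · exact Or.inr hx
      rw [if_neg hji]
      by_cases hjL : (j : Int) ∈ L
      · rw [if_pos hjL, if_pos (hiff.2 hjL)]
      · rw [if_neg hjL, if_neg (fun hx => hjL (hiff.1 hx))]
  have h2 : PySem.List.pyGet? prv cur = some (rkP L p) := by
    rw [pyGet?_nonneg' prv cur h0cur]; exact hlk.1
  have h3 : PySem.List.pyGet? nxt cur = some (rkN L p) := by
    rw [pyGet?_nonneg' nxt cur h0cur]; exact hlk.2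
  have h4 : (if rkP L p ≠ -1 then PySem.List.pySet? nxt (rkP L p) (rkN L p) else some nxt)
      = some (if rkP L p ≠ -1 then nxt.set (rkP L p).toNat (rkN L p) else nxt) := by
    rcases hpn_cases with ⟨_, _, h0pn, hpnm⟩ | ⟨_, hv⟩
    · rw [if_pos (by omega), if_pos (by omega)]
      apply pySet?_nonneg' _ _ _ h0pn
      have := (hLmem _ hpnm).2
      have := (hLmem _ hpnm).1
      omega
    · rw [hv]
      simp
  have h5 : (if rkN L p ≠ -1 then PySem.List.pySet? prv (rkN L p) (rkP L p) else some prv)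
      = some (if rkN L p ≠ -1 then prv.set (rkN L p).toNat (rkP L p) else prv) := by
    rcases hnn_cases with ⟨_, _, h0nn, hnnm⟩ | ⟨_, hv⟩
    · rw [if_pos (by omega), if_pos (by omega)]
      apply pySet?_nonneg' _ _ _ h0nn
      have := (hLmem _ hnnm).2
      have := (hLmem _ hnnm).1
      omega
    · rw [hv]
      simp
  -- the B-side pop
  have hpop : PySem.List.pop? L pos = some (cur, L.eraseIdx p) := by
    rw [show pos = (p : Int) by omega]
    rw [PySem.List.pop?_natCast L p hp, hcurval]
  have hlenE : PySem.List.len (L.eraseIdx p) = (L.length : Int) - 1 := by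
    rw [PySem.List.len_eq]; omega
  refine ⟨?_, ?_, ?_, by rw [hlenE]⟩
  · simp [stepA, hh', h1, h2, h3, h4, h5, halive2]
  · simp [stepB, hh', hpop]
  · -- the new invariant
    constructor
    case hn => exact hn
    case hplen =>
      rcases hnn_cases with ⟨_, _, h0nn, _⟩ | ⟨_, hv⟩
      · rw [if_pos (by omega), List.length_set]; exact hplen
      · rw [hv]; simpa using hplen
    case hnlen =>
      rcases hpn_cases with ⟨_, _, h0pn, _⟩ | ⟨_, hv⟩
      · rw [if_pos (by omega), List.length_set]; exact hnlen
      · rw [hv]; simpa using hnlen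
    case hrem => rw [hrem]
    case hsort => exact hsort.sublist (List.eraseIdx_sublist L p)
    case hLmem => exact fun i hi => hLmem i (List.eraseIdx_subset hi)
    case hDmem =>
      intro i hi
      rcases List.mem_append.1 hi with hx | hx
      · exact hDmem i hx
      · have hx' : i = cur := by simpa using hx
        subst hx'
        exact ⟨h0cur, hcurn⟩
    case hdisj =>
      intro i hi
      rcases List.mem_append.1 hi with hx | hx
      · exact fun hmem => hdisj i hx (List.eraseIdx_subset hmem)
      · have hx' : i = cur := by simpa using hx
        subst hx'
        rw [herase]
        intro hmem
        rcases List.mem_append.1 hmem with hy | hy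
        · exact absurd (hPlt _ hy) (by rw [hcurval]; omega)
        · exact absurd (hSgt _ hy) (by rw [hcurval]; omega)
    case hDnd =>
      rw [List.nodup_append]
      refine ⟨hDnd, List.nodup_singleton _, ?_⟩
      intro a ha b hb
      have hb' : b = cur := by simpa using hb
      subst hb'
      exact fun hac => hdisj a ha (hac ▸ hcmem)
    case hlen =>
      rw [List.length_append, List.length_singleton]
      omega
    case halive => rfl
    case hmode =>
      rw [hlenE]
      by_cases hone : L.length = 1
      · -- the only row was deleted: both cursors park at -1
        have hp0 : p = 0 := by omega
        have hS : S = [] := by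
          apply List.eq_nil_of_length_eq_zero; omega
        have hP : P = [] := by
          apply List.eq_nil_of_length_eq_zero; omega
        have hrkN : rkN L p = -1 := by
          rw [hnn_eq, hS]; simp
        have hrkP : rkP L p = -1 := by
          rw [hpn_eq, hP]; simp
        right
        constructor
        · rw [hrkN, hrkP, if_neg (show ¬ (-1 : Int) ≠ -1 by omega),
            if_pos (show pos = (L.length : Int) - 1 by omega)]
          omega
        · left
          rw [if_pos (show pos = (L.length : Int) - 1 by omega)]
          omega
      · left
        rcases hnn_cases with ⟨hlt, hv, h0nn, _⟩ | ⟨heq2, hv⟩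
        · -- a next row exists: the cursor keeps its rank
          rw [if_neg (show ¬ pos = (L.length : Int) - 1 by omega)]
          refine ⟨by omega, by omega, ?_⟩
          rw [if_pos (show rkN L p ≠ -1 by omega), hv]
          rw [herase, getD_flat, if_neg (by omega)]
          have h00 : pos.toNat - P.length = 0 := by omega
          rw [h00, hSdef]
          rw [List.getD_eq_getElem?_getD, List.getD_eq_getElem?_getD]
          congr 1
          rw [List.getElem?_drop]
        · -- the last rank was deleted: the cursor moves up one rank
          rw [if_pos (show pos = (L.length : Int) - 1 by omega)]
          rcases hpn_cases with ⟨hp1, hv2, h0pn, _⟩ | ⟨hp0, _⟩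
          · refine ⟨by omega, by omega, ?_⟩
            rw [if_neg (show ¬ rkN L p ≠ -1 by omega), hv2]
            rw [herase, getD_flat, if_pos (by rw [hPlen]; omega)]
            rw [hPdef, getD_take' L p ((pos - 1).toNat) (-1) (by omega)]
            congr 1
            omega
          · omega
    case hlinks =>
      rw [herase, hpn_eq, hnn_eq]
      apply links_erase prv nxt P S cur
      · exact fun y hy => (hLmem _ (hPsub y hy)).1
      · exact fun y hy => (hLmem _ (hSsub y hy)).1
      · exact h0cur
      · intro y hy; rw [hcurval]; exact hPlt y hy
      · intro y hy; rw [hcurval]; exact hSgt y hy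
      · exact hsortP
      · exact hsortS
      · rw [hcurval, ← hdecomp]
        exact hlinks
    case hdead =>
      rw [List.reverse_append, List.reverse_singleton, List.singleton_append]
      refine ⟨P, S, herase, ?_, ?_, ?_, ?_, ?_⟩
      · intro y hy; rw [hcurval]; exact hPlt y hy
      · intro y hy; rw [hcurval]; exact hSgt y hy
      · rw [← hpn_eq]
        rcases hnn_cases with ⟨hlt1, hv, h0nn, hnnm⟩ | ⟨_, hv⟩
        · rw [if_pos (by omega)]
          have hne : cur ≠ rkN L p := by
            have hlt2 : L.getD p (-1) < L.getD (p+1) (-1) :=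
              sorted_getD_lt L (-1) hsort p (p+1) hp (by omega) (by omega)
            rw [← hcur] at hlt2
            rw [hv]
            omega
          rw [List.getElem?_set_ne (by omega)]
          exact hlk.1
        · rw [hv, if_neg (show ¬ (-1 : Int) ≠ -1 by omega)]
          exact hlk.1
      · rw [← hnn_eq]
        rcases hpn_cases with ⟨_, hv, h0pn, hpnm⟩ | ⟨_, hv⟩
        · rw [if_pos (by omega)]
          have hne : cur ≠ rkP L p := by
            have : L.getD (p-1) (-1) < L.getD p (-1) :=
              sorted_getD_lt L (-1) hsort (p-1) p (by omega) hp (by omega)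
            rw [← hcur] at this
            rw [hv]
            omega
          rw [List.getElem?_set_ne (by omega)]
          exact hlk.2
        · rw [hv, if_neg (show ¬ (-1 : Int) ≠ -1 by omega)]
          exact hlk.2
      · rw [hcurval, ← hdecomp]
        apply deadinv_stable prv nxt _ _ dead.reverse L ?agree hdead
        case agree =>
          intro r hr
          have hrd : r ∈ dead := List.mem_reverse.1 hr
          have hrL : r ∉ L := hdisj r hrd
          have h0r : 0 ≤ r := (hDmem r hrd).1
          constructor
          · rcases hnn_cases with ⟨_, _, h0nn, hnnm⟩ | ⟨_, hv⟩
            · rw [if_pos (by omega)]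
              refine List.getElem?_set_ne ?_
              have hrne : r ≠ rkN L p := by
                intro hcon
                rw [hcon] at hrL
                exact hrL hnnm
              omega
            · rw [hv, if_neg (show ¬ (-1 : Int) ≠ -1 by omega)]
          · rcases hpn_cases with ⟨_, _, h0pn, hpnm⟩ | ⟨_, hv⟩
            · rw [if_pos (by omega)]
              refine List.getElem?_set_ne ?_
              have hrne : r ≠ rkP L p := by
                intro hcon
                rw [hcon] at hrL
                exact hrL hpnm
              omega
            · rw [hv, if_neg (show ¬ (-1 : Int) ≠ -1 by omega)]

theorem case_Z (n : Int) (c : String)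
    (prv nxt removed : List Int) (alive : List String) (cur : Int)
    (L dead : List Int) (pos : Int) (dInit : List Int) (r : Int)
    (hh : pHead c = some "Z") (hform : dead = dInit ++ [r])
    (hInv : SimInv n prv nxt removed alive cur L dead pos) :
    ∃ prv2 nxt2 L2 pos2,
      stepA (prv, nxt, removed, alive, cur) c = some (prv2, nxt2, dInit,
        (List.range n.toNat).map (fun (j : Nat) => if (j : Int) ∈ L2 then "O" else "X"), cur) ∧
      stepB (L, dead, pos) c = some (L2, dInit, pos2) ∧
      SimInv n prv2 nxt2 dInit
        ((List.range n.toNat).map (fun (j : Nat) => if (j : Int) ∈ L2 then "O" else "X"))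
        cur L2 dInit pos2 ∧
      pos2 = (if ((L.filter (fun i => decide (i < r))).length : Int) ≤ pos
              then pos + 1 else pos) := by
  have hh' : PySem.List.pyGet? (PySem.Str.split₀ c) 0 = some "Z" := hh
  obtain ⟨hn, hplen, hnlen, hrem, hsort, hLmem, hDmem, hdisj, hDnd, hlen, halive,
    hmode, hlinks, hdead⟩ := hInv
  have hrdead : r ∈ dead := by rw [hform]; simp
  have h0r : 0 ≤ r := (hDmem r hrdead).1
  have hrn : r < n := (hDmem r hrdead).2
  have hrL : r ∉ L := hdisj r hrdead
  have hrev : dead.reverse = r :: dInit.reverse := by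
    rw [hform, List.reverse_append, List.reverse_singleton, List.singleton_append]
  rw [hrev] at hdead
  obtain ⟨P, S, hLPS, hPr, hrS, hpr, hnr, hrest⟩ := hdead
  have hsortL : (P ++ S).Pairwise (· < ·) := hLPS ▸ hsort
  have hsortP : P.Pairwise (· < ·) := hsortL.sublist (List.sublist_append_left P S)
  have hsortS : S.Pairwise (· < ·) := hsortL.sublist (List.sublist_append_right P S)
  have hPsub : ∀ y ∈ P, y ∈ L := by
    intro y hy; rw [hLPS]; exact List.mem_append.2 (Or.inl hy)
  have hSsub : ∀ y ∈ S, y ∈ L := by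
    intro y hy; rw [hLPS]; exact List.mem_append.2 (Or.inr hy)
  have hnnP : ∀ y ∈ P, 0 ≤ y := fun y hy => (hLmem _ (hPsub y hy)).1
  have hnnS : ∀ y ∈ S, 0 ≤ y := fun y hy => (hLmem _ (hSsub y hy)).1
  set L2 := P ++ r :: S with hL2def
  have hL2len : L2.length = L.length + 1 := by
    rw [hL2def, hLPS]
    simp only [List.length_append, List.length_cons]
    omega
  have hLflat : L.length = P.length + S.length := by
    rw [hLPS, List.length_append]
  -- neighbour characterisations
  have hpnv : P.getLast?.getD (-1) = P.getD (P.length - 1) (-1) := by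
    rw [List.getLast?_eq_getElem?, List.getD_eq_getElem?_getD]
  have hnnv : S.head?.getD (-1) = S.getD 0 (-1) := by cases S <;> simp
  have hpn_cases : (P ≠ [] ∧ 0 ≤ P.getLast?.getD (-1) ∧ P.getLast?.getD (-1) ∈ P)
      ∨ (P = [] ∧ P.getLast?.getD (-1) = -1) := by
    by_cases hP : P = []
    · right; rw [hP]; exact ⟨rfl, rfl⟩
    · left
      have hl : 0 < P.length := List.length_pos_of_ne_nil hP
      have hmem : P.getD (P.length - 1) (-1) ∈ P := getD_mem P _ (-1) (by omega)
      exact ⟨hP, hpnv ▸ hnnP _ hmem, hpnv ▸ hmem⟩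
  have hnn_cases : (S ≠ [] ∧ 0 ≤ S.head?.getD (-1) ∧ S.head?.getD (-1) ∈ S)
      ∨ (S = [] ∧ S.head?.getD (-1) = -1) := by
    by_cases hS : S = []
    · right; rw [hS]; exact ⟨rfl, rfl⟩
    · left
      have hl : 0 < S.length := List.length_pos_of_ne_nil hS
      have hmem : S.getD 0 (-1) ∈ S := getD_mem S _ (-1) (by omega)
      exact ⟨hS, hnnv ▸ hnnS _ hmem, hnnv ▸ hmem⟩
  -- A-side evaluations
  have hpopA : PySem.List.pop? removed = some (r, dInit) := by
    rw [hrem, hform]; exact PySem.List.pop?_last dInit r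
  have h1 : PySem.List.pySet? alive r "O" = some (alive.set r.toNat "O") := by
    apply pySet?_nonneg' _ _ _ h0r
    rw [halive]
    simp only [List.length_map, List.length_range]
    omega
  have halive2 : alive.set r.toNat "O"
      = (List.range n.toNat).map (fun (j : Nat) => if (j : Int) ∈ L2 then "O" else "X") := by
    rw [halive, set_map_range n.toNat r.toNat "O" _ (by omega)]
    apply List.map_congr_left
    intro j hj
    rw [List.mem_range] at hj
    by_cases hji : j = r.toNat
    · have hjr : (j : Int) = r := by omega
      have hmem2 : (j : Int) ∈ L2 := by
        rw [hL2def, hjr]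
        exact List.mem_append.2 (Or.inr (List.mem_cons_self ..))
      rw [if_pos hji, if_pos hmem2]
    · have hjr : (j : Int) ≠ r := by omega
      have hiff : (j : Int) ∈ L2 ↔ (j : Int) ∈ L := by
        rw [hL2def, hLPS]
        simp only [List.mem_append, List.mem_cons]
        constructor
        · rintro (hx | hx | hx)
          · exact Or.inl hx
          · exact absurd hx hjr
          · exact Or.inr hx
        · rintro (hx | hx)
          · exact Or.inl hx
          · exact Or.inr (Or.inr hx)
      rw [if_neg hji]
      by_cases hjL : (j : Int) ∈ L
      · rw [if_pos hjL, if_pos (hiff.2 hjL)]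
      · rw [if_neg hjL, if_neg (fun hx => hjL (hiff.1 hx))]
  have h2 : PySem.List.pyGet? prv r = some (P.getLast?.getD (-1)) := by
    rw [pyGet?_nonneg' prv r h0r]; exact hpr
  have h3 : PySem.List.pyGet? nxt r = some (S.head?.getD (-1)) := by
    rw [pyGet?_nonneg' nxt r h0r]; exact hnr
  have h4 : (if P.getLast?.getD (-1) ≠ -1
        then PySem.List.pySet? nxt (P.getLast?.getD (-1)) r else some nxt)
      = some (if P.getLast?.getD (-1) ≠ -1
        then nxt.set (P.getLast?.getD (-1)).toNat r else nxt) := by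
    rcases hpn_cases with ⟨_, h0pn, hpnm⟩ | ⟨_, hv⟩
    · rw [if_pos (by omega), if_pos (by omega)]
      apply pySet?_nonneg' _ _ _ h0pn
      have h1' := (hLmem _ (hPsub _ hpnm)).2
      have h2' := (hLmem _ (hPsub _ hpnm)).1
      omega
    · rw [hv]; simp
  have h5 : (if S.head?.getD (-1) ≠ -1
        then PySem.List.pySet? prv (S.head?.getD (-1)) r else some prv)
      = some (if S.head?.getD (-1) ≠ -1
        then prv.set (S.head?.getD (-1)).toNat r else prv) := by
    rcases hnn_cases with ⟨_, h0nn, hnnm⟩ | ⟨_, hv⟩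
    · rw [if_pos (by omega), if_pos (by omega)]
      apply pySet?_nonneg' _ _ _ h0nn
      have h1' := (hLmem _ (hSsub _ hnnm)).2
      have h2' := (hLmem _ (hSsub _ hnnm)).1
      omega
    · rw [hv]; simp
  -- B-side evaluations
  have hpopB : PySem.List.pop? dead = some (r, dInit) := by
    rw [hform]; exact PySem.List.pop?_last dInit r
  have hbs : bsLoop L r 0 L.length = P.length := by
    rw [hLPS]
    exact bsLoop_decomp P S r hPr hrS
  have hins : PySem.List.insert L ((P.length : Nat) : Int) r = L2 := by
    rw [hLPS, PySem.List.insert_natCast _ _ _ (by simp), List.take_left, List.drop_left, hL2def]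
  have hfil : L.filter (fun i => decide (i < r)) = P := by
    rw [hLPS, List.filter_append]
    have e1 : P.filter (fun i => decide (i < r)) = P :=
      filter_true_of_all (fun a ha => by simpa using hPr a ha)
    have e2 : S.filter (fun i => decide (i < r)) = [] := by
      simp only [List.filter_eq_nil_iff]
      intro a ha
      have := hrS a ha
      simp
      omega
    rw [e1, e2, List.append_nil]
  refine ⟨(if S.head?.getD (-1) ≠ -1 then prv.set (S.head?.getD (-1)).toNat r else prv),
          (if P.getLast?.getD (-1) ≠ -1 then nxt.set (P.getLast?.getD (-1)).toNat r else nxt),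
          L2, (if ((P.length : Nat) : Int) ≤ pos then pos + 1 else pos), ?_, ?_, ?_, ?_⟩
  · simp [stepA, hh', hpopA, h1, h2, h3, h4, h5, halive2]
  · simp [stepB, hh', hpopB, hbs, hins]
  · -- invariant
    constructor
    case hn => exact hn
    case hplen =>
      rcases hnn_cases with ⟨_, h0nn, _⟩ | ⟨_, hv⟩
      · rw [if_pos (by omega), List.length_set]; exact hplen
      · rw [hv]; simpa using hplen
    case hnlen =>
      rcases hpn_cases with ⟨_, h0pn, _⟩ | ⟨_, hv⟩
      · rw [if_pos (by omega), List.length_set]; exact hnlen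
      · rw [hv]; simpa using hnlen
    case hrem => rfl
    case hsort =>
      rw [hL2def]
      rw [List.pairwise_append]
      refine ⟨hsortP, ?_, ?_⟩
      · rw [List.pairwise_cons]
        exact ⟨hrS, hsortS⟩
      · intro a ha b hb
        rcases List.mem_cons.1 hb with rfl | hb'
        · exact hPr a ha
        · exact lt_trans (hPr a ha) (hrS b hb')
    case hLmem =>
      intro i hi
      rw [hL2def] at hi
      rcases List.mem_append.1 hi with hx | hx
      · exact hLmem i (hPsub i hx)
      · rcases List.mem_cons.1 hx with rfl | hx'
        · exact ⟨h0r, hrn⟩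
        · exact hLmem i (hSsub i hx')
    case hDmem =>
      intro i hi
      exact hDmem i (by rw [hform]; exact List.mem_append.2 (Or.inl hi))
    case hdisj =>
      intro i hi
      have hid : i ∈ dead := by rw [hform]; exact List.mem_append.2 (Or.inl hi)
      have hiL : i ∉ L := hdisj i hid
      have hir : i ≠ r := by
        intro hcon
        subst hcon
        have := hDnd
        rw [hform, List.nodup_append] at this
        exact this.2.2 i hi i (List.mem_singleton.2 rfl) rfl
      rw [hL2def]
      intro hmem
      rcases List.mem_append.1 hmem with hx | hx
      · exact hiL (hPsub i hx)
      · rcases List.mem_cons.1 hx with hx' | hx'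
        · exact hir hx'
        · exact hiL (hSsub i hx')
    case hDnd =>
      have : dInit.Sublist dead := by rw [hform]; exact List.sublist_append_left dInit [r]
      exact this.nodup hDnd
    case hlen =>
      rw [hL2len]
      have : dead.length = dInit.length + 1 := by rw [hform]; simp
      omega
    case halive => rfl
    case hmode =>
      rcases hmode with ⟨hpos0, hposlt, hcur⟩ | ⟨hc, hrest⟩
      · -- live cursor: its rank shifts by one iff the restored row lands at or before it
        left
        refine ⟨by split_ifs <;> omega, ?_, ?_⟩
        · rw [show ((L2.length : Nat) : Int) = (L.length : Int) + 1 by rw [hL2len]; push_cast; ring]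
          split_ifs <;> omega
        · by_cases hcond : ((P.length : Nat) : Int) ≤ pos
          · rw [if_pos hcond]
            rw [hL2def, getD_mid, if_neg (by omega), if_neg (by omega)]
            rw [hcur, hLPS, getD_flat, if_neg (by omega)]
            congr 1
            omega
          · rw [if_neg hcond]
            rw [hL2def, getD_mid, if_pos (by omega)]
            rw [hcur, hLPS, getD_flat, if_pos (by omega)]
      · -- parked cursor (cur = pos = -1 …): Z leaves it alone on both sides
        have hpneg : pos ≤ -1 := by
          rcases hrest with h | ⟨_, hde⟩
          · exact h
          · rw [hform] at hde; simp at hde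
        have hcond : ¬ ((P.length : Nat) : Int) ≤ pos := by omega
        right
        rw [if_neg hcond]
        exact ⟨hc, Or.inl hpneg⟩
    case hlinks =>
      rw [hL2def]
      apply links_insert prv nxt P S r hnnP hnnS h0r hPr hrS hsortP hsortS _ hpr hnr
      rw [← hLPS]
      exact hlinks
    case hdead =>
      apply deadinv_stable prv nxt _ _ dInit.reverse L2 ?agree (by rw [hL2def] at hrest ⊢; exact hrest)
      case agree =>
        intro q hq
        have hqd : q ∈ dead := by
          rw [hform]
          exact List.mem_append.2 (Or.inl (List.mem_reverse.1 hq))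
        have hqL : q ∉ L := hdisj q hqd
        have h0q : 0 ≤ q := (hDmem q hqd).1
        constructor
        · rcases hnn_cases with ⟨_, h0nn, hnnm⟩ | ⟨_, hv⟩
          · rw [if_pos (by omega)]
            refine List.getElem?_set_ne ?_
            have hqne : q ≠ S.head?.getD (-1) := by
              intro hcon
              rw [hcon] at hqL
              exact hqL (hSsub _ hnnm)
            omega
          · rw [hv, if_neg (show ¬ (-1 : Int) ≠ -1 by omega)]
        · rcases hpn_cases with ⟨_, h0pn, hpnm⟩ | ⟨_, hv⟩
          · rw [if_pos (by omega)]
            refine List.getElem?_set_ne ?_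
            have hqne : q ≠ P.getLast?.getD (-1) := by
              intro hcon
              rw [hcon] at hqL
              exact hqL (hPsub _ hpnm)
            omega
          · rw [hv, if_neg (show ¬ (-1 : Int) ≠ -1 by omega)]
  · rw [hfil]

-- ---------- command shape facts ----------

theorem wf_head (c : String) (hwfc : wf c = true) : ∃ h, pHead c = some h := by
  unfold wf at hwfc
  cases hph : pHead c
  · rw [hph] at hwfc; simp at hwfc
  · exact ⟨_, rfl⟩

theorem wf_amt (c : String) (h : String) (hh : pHead c = some h)
    (hUD : h = "U" ∨ h = "D") (hwfc : wf c = true) :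
    ∃ s x, PySem.List.pyGet? (PySem.Str.split₀ c) 1 = some s ∧
      PySem.Int.ofStr? s = some x ∧ 0 ≤ x ∧ pAmt c = some x := by
  unfold wf at hwfc
  rw [hh] at hwfc
  cases hpa : pAmt c with
  | none =>
    exfalso
    rw [hpa] at hwfc
    rcases hUD with rfl | rfl <;> simp at hwfc
  | some x =>
    rw [hpa] at hwfc
    have hx0 : 0 ≤ x := by
      rcases hUD with rfl | rfl <;> simpa using hwfc
    have hpaC := hpa
    unfold pAmt at hpa
    cases hg1 : PySem.List.pyGet? (PySem.Str.split₀ c) 1 with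
    | none => rw [hg1] at hpa; simp at hpa
    | some s =>
      rw [hg1] at hpa
      exact ⟨s, x, rfl, hpa, hx0, rfl⟩

-- ---------- the main induction ----------

theorem run_equiv (n : Int) : ∀ (cs : List String) (prv nxt removed : List Int)
    (alive : List String) (cur : Int) (L dead : List Int) (pos : Int),
    (∀ c ∈ cs, wf c = true) →
    okSteps n cs pos dead.reverse = true →
    SimInv n prv nxt removed alive cur L dead pos →
    ∃ prv' nxt' removed' alive' cur' L' dead' pos',
      runA cs (some (prv, nxt, removed, alive, cur)) = some (prv', nxt', removed', alive', cur') ∧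
      runB cs (some (L, dead, pos)) = some (L', dead', pos') ∧
      SimInv n prv' nxt' removed' alive' cur' L' dead' pos' := by
  intro cs
  induction cs with
  | nil =>
    intro prv nxt removed alive cur L dead pos _ _ hInv
    exact ⟨prv, nxt, removed, alive, cur, L, dead, pos, rfl, rfl, hInv⟩
  | cons c cs ih =>
    intro prv nxt removed alive cur L dead pos hwf hok hInv
    have hwfc := hwf c (List.mem_cons_self ..)
    have hwft : ∀ c' ∈ cs, wf c' = true := fun c' hc' => hwf c' (List.mem_cons_of_mem _ hc')
    obtain ⟨h, hh⟩ := wf_head c hwfc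
    have hstk : (dead.reverse).length = dead.length := List.length_reverse ..
    have hsize : (L.length : Int) = n - ((dead.reverse).length : Int) := by
      have h1 := hInv.hlen
      have h2 := hInv.hn
      omega
    rw [runA_cons, runB_cons, Option.bind_some, Option.bind_some]
    by_cases hU : h = "U"
    · subst hU
      obtain ⟨s, x, hs1, hofs, hx0, hpa⟩ := wf_amt c _ hh (Or.inl rfl) hwfc
      rw [okSteps_U n c cs pos dead.reverse hh, hpa] at hok
      simp only [Option.getD_some] at hok
      by_cases hx0' : x ≤ 0
      · rw [if_pos hx0'] at hok
        obtain ⟨hA, hB⟩ := case_UD0 c s "U" prv nxt removed alive cur L dead pos hh (Or.inl rfl)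
          hs1 (by rw [show x = 0 by omega] at hofs; exact hofs)
        rw [hA, hB]
        exact ih _ _ _ _ _ _ _ _ hwft hok hInv
      · rw [if_neg hx0', Bool.and_eq_true, Bool.and_eq_true] at hok
        obtain ⟨⟨hd1, hd2⟩, hok⟩ := hok
        simp only [decide_eq_true_eq] at hd1 hd2
        obtain ⟨hA, hB, hInv2⟩ := case_U n c s x prv nxt removed alive cur L dead pos hh hs1 hofs
          (by omega) hd1 (by omega) hInv
        rw [hA, hB]
        exact ih _ _ _ _ _ _ _ _ hwft hok hInv2
    · by_cases hD : h = "D"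
      · subst hD
        obtain ⟨s, x, hs1, hofs, hx0, hpa⟩ := wf_amt c _ hh (Or.inr rfl) hwfc
        rw [okSteps_D n c cs pos dead.reverse hh, hpa] at hok
        simp only [Option.getD_some] at hok
        by_cases hx0' : x ≤ 0
        · rw [if_pos hx0'] at hok
          obtain ⟨hA, hB⟩ := case_UD0 c s "D" prv nxt removed alive cur L dead pos hh (Or.inr rfl)
            hs1 (by rw [show x = 0 by omega] at hofs; exact hofs)
          rw [hA, hB]
          exact ih _ _ _ _ _ _ _ _ hwft hok hInv
        · rw [if_neg hx0', Bool.and_eq_true, Bool.and_eq_true] at hok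
          obtain ⟨⟨hd1, hd2⟩, hok⟩ := hok
          simp only [decide_eq_true_eq] at hd1 hd2
          obtain ⟨hA, hB, hInv2⟩ := case_D n c s x prv nxt removed alive cur L dead pos hh hs1 hofs
            (by omega) hd1 (by omega) hInv
          rw [hA, hB]
          exact ih _ _ _ _ _ _ _ _ hwft hok hInv2
      · by_cases hC : h = "C"
        · subst hC
          rw [okSteps_C n c cs pos dead.reverse hh, Bool.and_eq_true, Bool.and_eq_true] at hok
          obtain ⟨⟨hd1, hd2⟩, hok⟩ := hok
          simp only [decide_eq_true_eq] at hd1 hd2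
          have hv0 : 0 ≤ pos := hd1
          have hvs : pos < (L.length : Int) := by omega
          have hAL : aliveOf n dead.reverse = L :=
            alive_char n prv nxt removed alive cur L dead pos hInv
          have hp : pos.toNat < L.length := by omega
          have hr0 : (aliveOf n dead.reverse).getD pos.toNat 0 = cur := by
            rw [hAL]
            have hcur := live_of_mode L dead cur pos hInv.hmode hv0 hvs
            rw [hcur, List.getD_eq_getElem _ _ hp, List.getD_eq_getElem _ _ hp]
          rw [hr0] at hok
          have hsize2 : n - ((dead.reverse).length : Int) - 1 = (L.length : Int) - 1 := by omega
          rw [hsize2] at hok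
          obtain ⟨hA, hB, hInv2, hposeq⟩ :=
            case_C n c prv nxt removed alive cur L dead pos hh hv0 hvs hInv
          rw [hA, hB]
          apply ih _ _ _ _ _ _ _ _ hwft ?_ hInv2
          rw [hposeq, List.reverse_append, List.reverse_singleton, List.singleton_append]
          exact hok
        · by_cases hZ : h = "Z"
          · subst hZ
            by_cases hd0 : dead = []
            · exfalso
              rw [hd0, List.reverse_nil, okSteps_Z_nil n c cs pos hh] at hok
              exact absurd hok (by simp)
            · have hform : dead = dead.dropLast ++ [dead.getLast hd0] :=
                (List.dropLast_append_getLast hd0).symm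
              have hrev : dead.reverse = dead.getLast hd0 :: (dead.dropLast).reverse := by
                conv_lhs => rw [hform]
                rw [List.reverse_append, List.reverse_singleton, List.singleton_append]
              have hAL : aliveOf n dead.reverse = L :=
                alive_char n prv nxt removed alive cur L dead pos hInv
              rw [hrev, okSteps_Z_cons n c cs pos _ _ hh] at hok
              rw [hrev] at hAL
              rw [hAL] at hok
              obtain ⟨prv2, nxt2, L2, pos2, hA, hB, hInv2, hpos2⟩ :=
                case_Z n c prv nxt removed alive cur L dead pos dead.dropLast
                  (dead.getLast hd0) hh hform hInv
              rw [hA, hB]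
              apply ih _ _ _ _ _ _ _ _ hwft ?_ hInv2
              rw [hpos2]
              exact hok
          · obtain ⟨hA, hB⟩ := case_skip c h prv nxt removed alive cur L dead pos hh hU hD hC hZ
            rw [hA, hB]
            rw [okSteps_other n c cs pos dead.reverse h hh hU hD hC hZ] at hok
            exact ih _ _ _ _ _ _ _ _ hwft hok hInv

theorem init_inv (n k : Int) (h1 : 1 ≤ n) :
    SimInv n ((PySem.List.pyRange 0 n 1).map (fun i => i - 1))
      (((PySem.List.pyRange 0 n 1).map (fun i => i + 1)).set
        (((PySem.List.pyRange 0 n 1).map (fun i => i + 1)).length - 1) (-1))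
      [] (PySem.List.pyRepeat ["O"] n) k (PySem.List.pyRange 0 n 1) [] k := by
  have hlenR : (PySem.List.pyRange 0 n 1).length = n.toNat := by
    rw [PySem.List.length_pyRange_one]; omega
  have hgetR : ∀ (j : Nat), j < n.toNat → (PySem.List.pyRange 0 n 1).getD j (-1) = (j : Int) := by
    intro j hj
    rw [List.getD_eq_getElem?_getD, PySem.List.getElem?_pyRange_one, if_pos (by omega)]
    simp
  constructor
  case hn => exact h1
  case hplen => simp [hlenR]
  case hnlen => simp [hlenR]
  case hrem => rfl
  case hsort => exact PySem.List.pairwise_lt_pyRange_one 0 n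
  case hLmem =>
    intro i hi
    rw [PySem.List.mem_pyRange_one] at hi
    exact hi
  case hDmem => intro i hi; simp at hi
  case hdisj => intro i hi; simp at hi
  case hDnd => exact List.nodup_nil
  case hlen => simp [hlenR]
  case halive =>
    rw [PySem.List.pyRepeat_singleton]
    have hcongr : ∀ j ∈ List.range n.toNat,
        (if ((j : Nat) : Int) ∈ PySem.List.pyRange 0 n 1 then "O" else "X") = "O" := by
      intro j hj
      rw [List.mem_range] at hj
      rw [if_pos (PySem.List.mem_pyRange_one.2 ⟨by omega, by omega⟩)]
    rw [List.map_congr_left hcongr]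
    rw [show (fun (_ : Nat) => "O") = Function.const Nat "O" from rfl, List.map_const,
      List.length_range]
  case hmode =>
    by_cases hk : 0 ≤ k ∧ k < n
    · left
      refine ⟨hk.1, by rw [hlenR]; omega, ?_⟩
      rw [hgetR k.toNat (by omega)]
      omega
    · right
      refine ⟨rfl, ?_⟩
      rcases (by omega : k ≤ -1 ∨ n ≤ k) with hx | hx
      · exact Or.inl hx
      · refine Or.inr ⟨?_, rfl⟩
        rw [hlenR]
        omega
  case hlinks =>
    intro j hj
    rw [hlenR] at hj
    rw [hgetR j hj]
    have hjt : ((j : Int)).toNat = j := by omega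
    rw [hjt]
    constructor
    · rw [List.getElem?_map, PySem.List.getElem?_pyRange_one, if_pos (by omega)]
      unfold rkP
      by_cases hj0 : j = 0
      · rw [if_pos hj0, hj0]
        simp
      · rw [if_neg hj0, hgetR (j-1) (by omega)]
        simp only [Option.map_some]
        congr 1
        omega
    · rw [List.getElem?_set]
      simp only [List.length_map]
      rw [hlenR]
      unfold rkN
      by_cases hjl : j = n.toNat - 1
      · rw [if_pos (by omega), if_pos (by omega)]
        rw [List.getD_eq_getElem?_getD, List.getElem?_eq_none_iff.2 (by rw [hlenR]; omega)]
        rfl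
      · rw [if_neg (by omega)]
        rw [List.getElem?_map, PySem.List.getElem?_pyRange_one, if_pos (by omega)]
        rw [hgetR (j+1) (by omega)]
        simp only [Option.map_some]
        congr 1
        omega
  case hdead => trivial

theorem final_string (n : Int) (L : List Int) (h1 : 1 ≤ n)
    (hmem : ∀ i ∈ L, 0 ≤ i ∧ i < n) :
    L.foldl (fun o i => o.bind (fun r => PySem.List.pySet? r i "O"))
        (some (PySem.List.pyRepeat ["X"] n))
      = some ((List.range n.toNat).map (fun (j : Nat) => if (j : Int) ∈ L then "O" else "X")) := by
  rw [PySem.List.pyRepeat_singleton]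
  have hrep : List.replicate n.toNat "X" = (List.range n.toNat).map (fun (_ : Nat) => "X") := by
    rw [show (fun (_ : Nat) => "X") = Function.const Nat "X" from rfl, List.map_const,
      List.length_range]
  rw [hrep]
  rw [setfold n.toNat L (fun _ => "X") (by
    intro i hi
    obtain ⟨hi1, hi2⟩ := hmem i hi
    exact ⟨hi1, by omega⟩)]

-- ===== VERDICT (by name: the statement is the Claim_ definition above) =====
theorem solution_spec : Claim_equal_solution := by
  intro n k cmd _hdom hpre
  obtain ⟨hn, hwf, hok⟩ := hpre
  unfold Spec_solution
  have hlenR : (PySem.List.pyRange 0 n 1).length = n.toNat := by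
    rw [PySem.List.length_pyRange_one]; omega
  have hne : ((PySem.List.pyRange 0 n 1).map (fun i => i + 1)) ≠ [] := by
    intro hcon
    have := congrArg List.length hcon
    simp [hlenR] at this
    omega
  have hset := pySet?_neg_one ((PySem.List.pyRange 0 n 1).map (fun i => i + 1)) (-1) hne
  obtain ⟨prv', nxt', removed', alive', cur', L', dead', pos', hA, hB, hInv'⟩ :=
    run_equiv n cmd _ _ [] (PySem.List.pyRepeat ["O"] n) k (PySem.List.pyRange 0 n 1) [] k
      hwf (by simpa using hok) (init_inv n k hn)
  unfold solution solution_alt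
  rw [hset]
  simp only [hA, hB]
  rw [final_string n L' hn hInv'.hLmem]
  rw [hInv'.halive]
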